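-- pv_equiv track=rewrite | github.com/DanielGodoyGalindo/adventJS_python | 2025/Challenge23.py | min_steps_to_deliver
-- ===== SOURCE A (Python) =====
-- from collections import deque
--
-- def min_steps_to_deliver(map: list[list[str]]) -> int:
--     rows = len(map)
--     cols = len(map[0])
--
--     # Find S
--     for row_idx in range(rows):
--         for col_idx in range(cols):
--             if map[row_idx][col_idx] == "S":
--                 start = (row_idx, col_idx)
--
--     # Initialize BFS structures
--     queue = deque([start]) # queue for BFS
--     distances = [[-1] * cols for _ in range(rows)] # distance grid
--     distances[start[0]][start[1]] = 0 # distance to start is 0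
--
--     # Possible moves: down, up, right, left
--     directions = [(1, 0), (-1, 0), (0, 1), (0, -1)]
--
--     # BFS (Breadth-First Search) is an algorithm used to explore a graph or a grid level by level, starting from a given point.
--     # In simple words: BFS visits all nearby positions first, then moves outward step by step.
--     while queue:
--         r, c = queue.popleft()
--
--         for dr, dc in directions:
--             nr, nc = r + dr, c + dc
--
--             # Check bounds, obstacles, and if not visited yet
--             if (
--                 0 <= nr < rows
--                 and 0 <= nc < cols
--                 and map[nr][nc] != "#"
--                 and distances[nr][nc] == -1
--             ):
--                 distances[nr][nc] = distances[r][c] + 1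
--                 queue.append((nr, nc))
--
--     # Sum the minimum distances to all houses 'G'
--     total_steps = 0
--
--     for i in range(rows):
--         for j in range(cols):
--             if map[i][j] == "G":
--                 if distances[i][j] == -1:
--                     return -1  # if there's a -1, that means a G can't be reached
--                 total_steps += distances[i][j]
--
--     return total_steps
-- ===== SOURCE B (Python) =====
-- def min_steps_to_deliver(map: list[list[str]]) -> int:
--     rows = len(map)
--     cols = len(map[0])
--
--     # Find S (last one wins, as in a row-major scan)
--     for r in range(rows):
--         for c in range(cols):
--             if map[r][c] == "S":
--                 start = (r, c)
--
--     # Bellman-Ford-style value iteration: start at 0, everything else at an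
--     # unreachable sentinel, then relax the whole grid (Jacobi sweeps) until
--     # the distance field is a fixpoint.  No queue, no frontier.
--     inf = rows * cols
--     dist = [[0 if (r, c) == start else inf for c in range(cols)] for r in range(rows)]
--     while True:
--         new = []
--         for r in range(rows):
--             row = []
--             for c in range(cols):
--                 best = dist[r][c]
--                 if map[r][c] != "#":
--                     for nr, nc in ((r - 1, c), (r + 1, c), (r, c - 1), (r, c + 1)):
--                         if 0 <= nr < rows and 0 <= nc < cols and dist[nr][nc] + 1 < best:
--                             best = dist[nr][nc] + 1
--                 row.append(best)
--             new.append(row)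
--         if new == dist:
--             break
--         dist = new
--
--     # Sum distances to all houses 'G'
--     total = 0
--     for r in range(rows):
--         for c in range(cols):
--             if map[r][c] == "G":
--                 if dist[r][c] == inf:
--                     return -1
--                 total += dist[r][c]
--     return total
-- ===== Notes on version B (the rewrite author's own statement) =====
-- stated objective: alternative
-- what changed: Replaces A's queue-driven BFS by Bellman-Ford-style value iteration: every cell starts at the unreachable sentinel rows*cols (0 at the start), then whole-grid Jacobi relaxation sweeps (each open cell becomes the min of itself and 1+neighbour) repeat until the distance field is a fixpoint; there is no queue, no frontier and no visited structure.
import Mathlib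
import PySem

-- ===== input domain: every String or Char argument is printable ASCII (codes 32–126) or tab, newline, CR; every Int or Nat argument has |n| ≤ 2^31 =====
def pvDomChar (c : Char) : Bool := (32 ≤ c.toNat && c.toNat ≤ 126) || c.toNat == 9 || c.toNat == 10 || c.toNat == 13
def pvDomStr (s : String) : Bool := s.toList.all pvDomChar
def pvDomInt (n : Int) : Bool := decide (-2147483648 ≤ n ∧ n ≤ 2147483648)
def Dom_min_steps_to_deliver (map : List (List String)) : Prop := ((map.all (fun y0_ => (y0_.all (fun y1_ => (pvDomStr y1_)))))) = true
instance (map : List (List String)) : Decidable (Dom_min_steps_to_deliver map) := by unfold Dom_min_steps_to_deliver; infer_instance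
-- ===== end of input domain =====

-- B replaces A's queue-driven BFS by Bellman-Ford-style value iteration: every cell starts
-- at the unreachable sentinel rows*cols (0 at the start cell) and whole-grid relaxation
-- sweeps (each open cell becomes the min of itself and 1 + a neighbour) repeat until the
-- distance field is a fixpoint; no queue, no frontier, no visited structure. Same values.

-- ===== PORT A =====
-- map[r][c] (reads in the ports are always guarded in-bounds where Python's are)
def pvCell (map : List (List String)) (r c : Nat) : String := (map.getD r []).getD c ""
-- distances[r][c]
def pvGet2 (g : List (List Int)) (r c : Nat) : Int := (g.getD r []).getD c 0
-- distances[r][c] = v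
def pvSet2 (g : List (List Int)) (r c : Nat) (v : Int) : List (List Int) := g.set r ((g.getD r []).set c v)
def pvDirs : List (Int × Int) := [(1, 0), (-1, 0), (0, 1), (0, -1)]
-- number of -1 cells (termination measure only)
def pvCnA (g : List (List Int)) : Nat := (g.map (fun row => row.countP (fun v => v == -1))).sum
-- invariant carried only for termination of the queue loop
def pvInvA (rows cols : Nat) (g : List (List Int)) : Prop :=
  g.length = rows ∧ (∀ row ∈ g, row.length = cols) ∧ ∀ row ∈ g, ∀ v ∈ row, -1 ≤ v

-- the body of A's for-loop over the four directions, for one dequeued cell rc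
def pvStepA (map : List (List String)) (rows cols : Nat)
    (st : List (List Int) × List (Nat × Nat)) (rc : Nat × Nat) : List (List Int) × List (Nat × Nat) :=
  pvDirs.foldl (fun st' dd =>
    if 0 ≤ (rc.1 : Int) + dd.1 ∧ (rc.1 : Int) + dd.1 < (rows : Int) ∧
       0 ≤ (rc.2 : Int) + dd.2 ∧ (rc.2 : Int) + dd.2 < (cols : Int) ∧
       pvCell map ((rc.1 : Int) + dd.1).toNat ((rc.2 : Int) + dd.2).toNat ≠ "#" ∧
       pvGet2 st'.1 ((rc.1 : Int) + dd.1).toNat ((rc.2 : Int) + dd.2).toNat = -1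
    then (pvSet2 st'.1 ((rc.1 : Int) + dd.1).toNat ((rc.2 : Int) + dd.2).toNat (pvGet2 st'.1 rc.1 rc.2 + 1),
          st'.2 ++ [(((rc.1 : Int) + dd.1).toNat, ((rc.2 : Int) + dd.2).toNat)])
    else st') st


theorem pvGet2_ge {rows cols : Nat} {g : List (List Int)} (h : pvInvA rows cols g) (r c : Nat) :
    -1 ≤ pvGet2 g r c := by
  unfold pvGet2
  rcases h with ⟨-, -, hval⟩
  rcases Nat.lt_or_ge r g.length with hr | hr
  · have hrow : g.getD r [] = g[r] := by simp [List.getD_eq_getElem?_getD, List.getElem?_eq_getElem hr]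
    rw [hrow]
    rcases Nat.lt_or_ge c g[r].length with hc | hc
    · have : g[r].getD c 0 = g[r][c] := by simp [List.getD_eq_getElem?_getD, List.getElem?_eq_getElem hc]
      rw [this]
      exact hval g[r] (List.getElem_mem hr) _ (List.getElem_mem hc)
    · simp [List.getD_eq_getElem?_getD, List.getElem?_eq_none hc]
  · simp [List.getD_eq_getElem?_getD, List.getElem?_eq_none hr]

theorem pvGet2_eq_getElem {g : List (List Int)} {r c : Nat} (hr : r < g.length)
    (hc : c < g[r].length) : pvGet2 g r c = g[r][c] := by
  unfold pvGet2
  simp [List.getD_eq_getElem?_getD, List.getElem?_eq_getElem hr, List.getElem?_eq_getElem hc]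

theorem pvCnA_cons (row : List Int) (g : List (List Int)) :
    pvCnA (row :: g) = row.countP (fun v => v == -1) + pvCnA g := by
  simp [pvCnA]

theorem pvCnA_set2 (g : List (List Int)) (r c : Nat) (v : Int)
    (hr : r < g.length) (hc : c < g[r].length) (hold : pvGet2 g r c = -1) (hv : v ≠ -1) :
    pvCnA (pvSet2 g r c v) + 1 = pvCnA g := by
  induction g generalizing r with
  | nil => simp at hr
  | cons row g ih =>
    cases r with
    | zero =>
      have hrow : pvSet2 (row :: g) 0 c v = (row.set c v) :: g := by
        simp [pvSet2]
      rw [hrow, pvCnA_cons, pvCnA_cons]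
      simp only [List.getElem_cons_zero] at hc
      have hcell : row[c] = -1 := by
        have := pvGet2_eq_getElem (g := row :: g) (r := 0) (c := c) (by simp) (by simpa using hc)
        simpa [hold] using this.symm
      have hcount := List.countP_set (p := fun v => v == -1) (l := row) (i := c) (a := v) hc
      have hpos : 1 ≤ row.countP (fun v => v == -1) := by
        have : row[c] ∈ row := List.getElem_mem hc
        have := List.countP_pos_iff (p := fun v => v == -1) (l := row) |>.mpr ⟨row[c], this, by simp [hcell]⟩
        omega
      rw [hcount]
      simp [hcell, hv]
      omega
    | succ r =>
      have hrow : pvSet2 (row :: g) (r + 1) c v = row :: pvSet2 g r c v := by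
        simp [pvSet2]
      rw [hrow, pvCnA_cons, pvCnA_cons]
      have hr' : r < g.length := by simpa using hr
      have hc' : c < g[r].length := by simpa using hc
      have hold' : pvGet2 g r c = -1 := by
        simpa [pvGet2] using hold
      have := ih r hr' hc' hold'
      omega

theorem pvInvA_set2 {rows cols : Nat} {g : List (List Int)} (h : pvInvA rows cols g)
    (r c : Nat) (v : Int) (hv : -1 ≤ v) : pvInvA rows cols (pvSet2 g r c v) := by
  obtain ⟨hlen, hshape, hval⟩ := h
  rcases Nat.lt_or_ge r g.length with hr | hr
  swap
  · have : pvSet2 g r c v = g := by unfold pvSet2; exact List.set_eq_of_length_le hr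
    rw [this]; exact ⟨hlen, hshape, hval⟩
  have hrowD : g.getD r [] = g[r] := by simp [List.getD_eq_getElem?_getD, List.getElem?_eq_getElem hr]
  refine ⟨by simpa [pvSet2] using hlen, ?_, ?_⟩
  · intro row hrow
    rcases List.mem_or_eq_of_mem_set hrow with hmem | heq
    · exact hshape row hmem
    · subst heq
      rw [List.length_set, hrowD]
      exact hshape _ (List.getElem_mem hr)
  · intro row hrow x hx
    rcases List.mem_or_eq_of_mem_set hrow with hmem | heq
    · exact hval row hmem x hx
    · subst heq
      rcases List.mem_or_eq_of_mem_set hx with hmem | heq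
      · rw [hrowD] at hmem
        exact hval _ (List.getElem_mem hr) _ hmem
      · subst heq; exact hv

theorem pvStepA_meas (map : List (List String)) (rows cols : Nat)
    (st : List (List Int) × List (Nat × Nat)) (rc : Nat × Nat) (h : pvInvA rows cols st.1) :
    pvInvA rows cols (pvStepA map rows cols st rc).1 ∧
      5 * pvCnA (pvStepA map rows cols st rc).1 + (pvStepA map rows cols st rc).2.length ≤
        5 * pvCnA st.1 + st.2.length := by
  unfold pvStepA
  have main : ∀ (ds : List (Int × Int)) (st : List (List Int) × List (Nat × Nat)),
      pvInvA rows cols st.1 →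
      pvInvA rows cols (ds.foldl (fun st' dd =>
        if 0 ≤ (rc.1 : Int) + dd.1 ∧ (rc.1 : Int) + dd.1 < (rows : Int) ∧
           0 ≤ (rc.2 : Int) + dd.2 ∧ (rc.2 : Int) + dd.2 < (cols : Int) ∧
           pvCell map ((rc.1 : Int) + dd.1).toNat ((rc.2 : Int) + dd.2).toNat ≠ "#" ∧
           pvGet2 st'.1 ((rc.1 : Int) + dd.1).toNat ((rc.2 : Int) + dd.2).toNat = -1
        then (pvSet2 st'.1 ((rc.1 : Int) + dd.1).toNat ((rc.2 : Int) + dd.2).toNat (pvGet2 st'.1 rc.1 rc.2 + 1),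
              st'.2 ++ [(((rc.1 : Int) + dd.1).toNat, ((rc.2 : Int) + dd.2).toNat)])
        else st') st).1 ∧
      5 * pvCnA ((ds.foldl (fun st' dd =>
        if 0 ≤ (rc.1 : Int) + dd.1 ∧ (rc.1 : Int) + dd.1 < (rows : Int) ∧
           0 ≤ (rc.2 : Int) + dd.2 ∧ (rc.2 : Int) + dd.2 < (cols : Int) ∧
           pvCell map ((rc.1 : Int) + dd.1).toNat ((rc.2 : Int) + dd.2).toNat ≠ "#" ∧
           pvGet2 st'.1 ((rc.1 : Int) + dd.1).toNat ((rc.2 : Int) + dd.2).toNat = -1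
        then (pvSet2 st'.1 ((rc.1 : Int) + dd.1).toNat ((rc.2 : Int) + dd.2).toNat (pvGet2 st'.1 rc.1 rc.2 + 1),
              st'.2 ++ [(((rc.1 : Int) + dd.1).toNat, ((rc.2 : Int) + dd.2).toNat)])
        else st') st)).1 + ((ds.foldl (fun st' dd =>
        if 0 ≤ (rc.1 : Int) + dd.1 ∧ (rc.1 : Int) + dd.1 < (rows : Int) ∧
           0 ≤ (rc.2 : Int) + dd.2 ∧ (rc.2 : Int) + dd.2 < (cols : Int) ∧
           pvCell map ((rc.1 : Int) + dd.1).toNat ((rc.2 : Int) + dd.2).toNat ≠ "#" ∧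
           pvGet2 st'.1 ((rc.1 : Int) + dd.1).toNat ((rc.2 : Int) + dd.2).toNat = -1
        then (pvSet2 st'.1 ((rc.1 : Int) + dd.1).toNat ((rc.2 : Int) + dd.2).toNat (pvGet2 st'.1 rc.1 rc.2 + 1),
              st'.2 ++ [(((rc.1 : Int) + dd.1).toNat, ((rc.2 : Int) + dd.2).toNat)])
        else st') st)).2.length ≤ 5 * pvCnA st.1 + st.2.length := by
    intro ds
    induction ds with
    | nil => intro st h; exact ⟨h, le_refl _⟩
    | cons dd ds ih =>
      intro st h
      simp only [List.foldl_cons]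
      by_cases hg : 0 ≤ (rc.1 : Int) + dd.1 ∧ (rc.1 : Int) + dd.1 < (rows : Int) ∧
           0 ≤ (rc.2 : Int) + dd.2 ∧ (rc.2 : Int) + dd.2 < (cols : Int) ∧
           pvCell map ((rc.1 : Int) + dd.1).toNat ((rc.2 : Int) + dd.2).toNat ≠ "#" ∧
           pvGet2 st.1 ((rc.1 : Int) + dd.1).toNat ((rc.2 : Int) + dd.2).toNat = -1
      · rw [if_pos hg]
        obtain ⟨h1, h2, h3, h4, h5, h6⟩ := hg
        set nr := ((rc.1 : Int) + dd.1).toNat with hnr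
        set nc := ((rc.2 : Int) + dd.2).toNat with hnc
        have hnrlt : nr < rows := by omega
        have hnclt : nc < cols := by omega
        have hglen : st.1.length = rows := h.1
        have hr : nr < st.1.length := by omega
        have hc : nc < st.1[nr].length := by
          have := h.2.1 _ (List.getElem_mem hr)
          omega
        have hvge : (0 : Int) ≤ pvGet2 st.1 rc.1 rc.2 + 1 := by
          have := pvGet2_ge h rc.1 rc.2
          omega
        have hinv' := pvInvA_set2 h nr nc (pvGet2 st.1 rc.1 rc.2 + 1) (by omega)
        have hcn := pvCnA_set2 st.1 nr nc (pvGet2 st.1 rc.1 rc.2 + 1) hr hc h6 (by omega)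
        have := ih (pvSet2 st.1 nr nc (pvGet2 st.1 rc.1 rc.2 + 1),
                    st.2 ++ [(nr, nc)]) hinv'
        refine ⟨this.1, ?_⟩
        refine le_trans this.2 ?_
        simp only [List.length_append, List.length_cons, List.length_nil]
        omega
      · rw [if_neg hg]
        exact ih st h
  exact main pvDirs st (by exact h)

theorem pvLoopA_dec (map : List (List String)) (rows cols : Nat) (g : List (List Int))
    (rc : Nat × Nat) (rest : List (Nat × Nat)) (h : pvInvA rows cols g) :
    5 * pvCnA (pvStepA map rows cols (g, rest) rc).1 +
      (pvStepA map rows cols (g, rest) rc).2.length <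
      5 * pvCnA g + (rc :: rest).length := by
  have := (pvStepA_meas map rows cols (g, rest) rc h).2
  simp only [List.length_cons] at this ⊢
  omega

-- A's while-queue BFS loop
def pvLoopA (map : List (List String)) (rows cols : Nat)
    (g : List (List Int)) (q : List (Nat × Nat)) (h : pvInvA rows cols g) : List (List Int) :=
  match q with
  | [] => g
  | rc :: rest =>
    pvLoopA map rows cols (pvStepA map rows cols (g, rest) rc).1 (pvStepA map rows cols (g, rest) rc).2
      ((pvStepA_meas map rows cols (g, rest) rc h).1)
termination_by 5 * pvCnA g + q.length
decreasing_by exact pvLoopA_dec map rows cols g rc rest h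

theorem pvInvA_init (rows cols a b : Nat) :
    pvInvA rows cols (pvSet2 (List.replicate rows (List.replicate cols (-1 : Int))) a b 0) := by
  have hbase : pvInvA rows cols (List.replicate rows (List.replicate cols (-1 : Int))) := by
    refine ⟨by simp, ?_, ?_⟩
    · intro row hrow; rw [List.eq_of_mem_replicate hrow]; simp
    · intro row hrow x hx
      rw [List.eq_of_mem_replicate hrow] at hx
      rw [List.eq_of_mem_replicate hx]
  exact pvInvA_set2 hbase a b 0 (by norm_num)

-- A's final double loop with its early 'return -1' (none = returned -1)
def pvScanA (map : List (List String)) (rows cols : Nat) (g : List (List Int)) : Int :=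
  match (List.range rows).foldl (fun acc r => (List.range cols).foldl (fun acc c =>
      acc.bind (fun t =>
        if pvCell map r c = "G" then
          (if pvGet2 g r c = -1 then none else some (t + pvGet2 g r c))
        else some t)) acc) (some (0 : Int)) with
  | none => -1
  | some t => t

def min_steps_to_deliver (map : List (List String)) : Int :=
  match (List.range map.length).foldl (fun st r =>
      (List.range (map.headD []).length).foldl (fun st c =>
        if pvCell map r c = "S" then some (r, c) else st) st) (none : Option (Nat × Nat)) with
  | none => -1   -- Python raises NameError ('start' unbound); excluded by Pre_
  | some s =>
    pvScanA map map.length (map.headD []).length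
      (pvLoopA map map.length (map.headD []).length
        (pvSet2 (List.replicate map.length (List.replicate (map.headD []).length (-1 : Int))) s.1 s.2 0)
        [s] (pvInvA_init _ _ _ _))

-- ===== PORT B =====
-- the four neighbour tuples B tries, in B's order ((r-1,c),(r+1,c),(r,c-1),(r,c+1))
def pvNbrs2 (r c : Nat) : List (Int × Int) :=
  [((r : Int) - 1, (c : Int)), ((r : Int) + 1, (c : Int)),
   ((r : Int), (c : Int) - 1), ((r : Int), (c : Int) + 1)]

-- B's innermost loop body: keep best, or take dist[nr][nc]+1 when in bounds and smaller
def pvRelaxStep (rows cols : Nat) (dist : List (List Int)) (best : Int) (p : Int × Int) : Int :=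
  if 0 ≤ p.1 ∧ p.1 < (rows : Int) ∧ 0 ≤ p.2 ∧ p.2 < (cols : Int) ∧
     pvGet2 dist p.1.toNat p.2.toNat + 1 < best
  then pvGet2 dist p.1.toNat p.2.toNat + 1 else best

-- one cell of one sweep: best = dist[r][c], relaxed over the four neighbours if not a wall
def pvRelax (map : List (List String)) (rows cols : Nat) (dist : List (List Int)) (r c : Nat) : Int :=
  if pvCell map r c ≠ "#" then
    (pvNbrs2 r c).foldl (pvRelaxStep rows cols dist) (pvGet2 dist r c)
  else pvGet2 dist r c

-- one whole Jacobi sweep: new grid computed from the old one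
def pvSweep (map : List (List String)) (rows cols : Nat) (dist : List (List Int)) : List (List Int) :=
  (List.range rows).map (fun r => (List.range cols).map (fun c => pvRelax map rows cols dist r c))

-- shape + nonnegativity, carried only for termination of the sweep loop
def pvInvJ (rows cols : Nat) (g : List (List Int)) : Prop :=
  g.length = rows ∧ (∀ row ∈ g, row.length = cols) ∧ ∀ row ∈ g, ∀ v ∈ row, 0 ≤ v

-- termination measure: total of the distance field
def pvSumJ (rows cols : Nat) (g : List (List Int)) : Nat :=
  (((List.range rows).flatMap (fun r => (List.range cols).map (fun c => (r, c)))).map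
    (fun p : Nat × Nat => (pvGet2 g p.1 p.2).toNat)).sum

theorem pvGet2_nonneg {rows cols : Nat} {g : List (List Int)} (h : pvInvJ rows cols g)
    (r c : Nat) : 0 ≤ pvGet2 g r c := by
  unfold pvGet2
  rcases h with ⟨-, -, hval⟩
  rcases Nat.lt_or_ge r g.length with hr | hr
  · have hrow : g.getD r [] = g[r] := by simp [List.getD_eq_getElem?_getD, List.getElem?_eq_getElem hr]
    rw [hrow]
    rcases Nat.lt_or_ge c g[r].length with hc | hc
    · have : g[r].getD c 0 = g[r][c] := by simp [List.getD_eq_getElem?_getD, List.getElem?_eq_getElem hc]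
      rw [this]
      exact hval g[r] (List.getElem_mem hr) _ (List.getElem_mem hc)
    · simp [List.getD_eq_getElem?_getD, List.getElem?_eq_none hc]
  · simp [List.getD_eq_getElem?_getD, List.getElem?_eq_none hr]

theorem pvRelaxFold_le_init (rows cols : Nat) (dist : List (List Int)) :
    ∀ (l : List (Int × Int)) (acc : Int), l.foldl (pvRelaxStep rows cols dist) acc ≤ acc := by
  intro l
  induction l with
  | nil => intro acc; exact le_refl _
  | cons p l ih =>
    intro acc
    simp only [List.foldl_cons]
    refine le_trans (ih _) ?_
    unfold pvRelaxStep
    split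
    · omega
    · exact le_refl _

theorem pvRelaxFold_nonneg {rows cols : Nat} {dist : List (List Int)} (h : pvInvJ rows cols dist) :
    ∀ (l : List (Int × Int)) (acc : Int), 0 ≤ acc →
      0 ≤ l.foldl (pvRelaxStep rows cols dist) acc := by
  intro l
  induction l with
  | nil => intro acc hacc; exact hacc
  | cons p l ih =>
    intro acc hacc
    simp only [List.foldl_cons]
    refine ih _ ?_
    unfold pvRelaxStep
    split
    · have := pvGet2_nonneg h p.1.toNat p.2.toNat; omega
    · exact hacc

theorem pvRelax_le (map : List (List String)) (rows cols : Nat) (dist : List (List Int))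
    (r c : Nat) : pvRelax map rows cols dist r c ≤ pvGet2 dist r c := by
  unfold pvRelax
  split
  · exact pvRelaxFold_le_init rows cols dist _ _
  · exact le_refl _

theorem pvRelax_nonneg {map : List (List String)} {rows cols : Nat} {dist : List (List Int)}
    (h : pvInvJ rows cols dist) (r c : Nat) : 0 ≤ pvRelax map rows cols dist r c := by
  unfold pvRelax
  split
  · exact pvRelaxFold_nonneg h _ _ (pvGet2_nonneg h r c)
  · exact pvGet2_nonneg h r c

theorem pvSweep_invJ (map : List (List String)) (rows cols : Nat) (dist : List (List Int))
    (h : pvInvJ rows cols dist) : pvInvJ rows cols (pvSweep map rows cols dist) := by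
  refine ⟨by simp [pvSweep], ?_, ?_⟩
  · intro row hrow
    simp only [pvSweep, List.mem_map, List.mem_range] at hrow
    obtain ⟨r, -, hr⟩ := hrow
    simp [← hr]
  · intro row hrow v hv
    simp only [pvSweep, List.mem_map, List.mem_range] at hrow
    obtain ⟨r, -, hr⟩ := hrow
    rw [← hr] at hv
    simp only [List.mem_map, List.mem_range] at hv
    obtain ⟨c, -, hc⟩ := hv
    rw [← hc]
    exact pvRelax_nonneg h r c

theorem pvGet2_sweep (map : List (List String)) (rows cols : Nat) (dist : List (List Int))
    {r c : Nat} (hr : r < rows) (hc : c < cols) :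
    pvGet2 (pvSweep map rows cols dist) r c = pvRelax map rows cols dist r c := by
  have hrow : (pvSweep map rows cols dist).getD r [] =
      (List.range cols).map (fun c => pvRelax map rows cols dist r c) := by
    unfold pvSweep
    rw [List.getD_eq_getElem?_getD, List.getElem?_map, List.getElem?_range hr]
    rfl
  unfold pvGet2
  rw [hrow, List.getD_eq_getElem?_getD, List.getElem?_map, List.getElem?_range hc]
  rfl

theorem pvEq_of_pointwise {rows cols : Nat} {a b : List (List Int)}
    (ha1 : a.length = rows) (ha2 : ∀ row ∈ a, row.length = cols)
    (hb1 : b.length = rows) (hb2 : ∀ row ∈ b, row.length = cols)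
    (h : ∀ r < rows, ∀ c < cols, pvGet2 a r c = pvGet2 b r c) : a = b := by
  apply List.ext_getElem (by omega)
  intro r hra hrb
  have hla : a[r].length = cols := ha2 _ (List.getElem_mem hra)
  have hlb : b[r].length = cols := hb2 _ (List.getElem_mem hrb)
  apply List.ext_getElem (by omega)
  intro c hca hcb
  have := h r (by omega) c (by omega)
  rwa [pvGet2_eq_getElem hra (by omega), pvGet2_eq_getElem hrb (by omega)] at this

theorem pvSweep_dec (map : List (List String)) (rows cols : Nat) (dist : List (List Int))
    (h : pvInvJ rows cols dist) (hne : pvSweep map rows cols dist ≠ dist) :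
    pvSumJ rows cols (pvSweep map rows cols dist) < pvSumJ rows cols dist := by
  have hinv' := pvSweep_invJ map rows cols dist h
  have hle : ∀ p ∈ (List.range rows).flatMap (fun r => (List.range cols).map (fun c => (r, c))),
      (pvGet2 (pvSweep map rows cols dist) p.1 p.2).toNat ≤ (pvGet2 dist p.1 p.2).toNat := by
    intro p _
    have h1 := pvRelax_le map rows cols dist p.1 p.2
    rcases Nat.lt_or_ge p.1 rows with hr | hr
    · rcases Nat.lt_or_ge p.2 cols with hc | hc
      · rw [pvGet2_sweep map rows cols dist hr hc]; omega
      · have : pvGet2 (pvSweep map rows cols dist) p.1 p.2 = 0 := by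
          unfold pvGet2
          rcases Nat.lt_or_ge p.1 (pvSweep map rows cols dist).length with hrl | hrl
          · have hrow : (pvSweep map rows cols dist).getD p.1 [] = (pvSweep map rows cols dist)[p.1] := by
              simp [List.getD_eq_getElem?_getD, List.getElem?_eq_getElem hrl]
            rw [hrow]
            have : (pvSweep map rows cols dist)[p.1].length = cols :=
              hinv'.2.1 _ (List.getElem_mem hrl)
            simp [List.getD_eq_getElem?_getD, List.getElem?_eq_none (by omega : (pvSweep map rows cols dist)[p.1].length ≤ p.2)]
          · simp [List.getD_eq_getElem?_getD, List.getElem?_eq_none hrl]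
        omega
    · have : pvGet2 (pvSweep map rows cols dist) p.1 p.2 = 0 := by
        unfold pvGet2
        simp [List.getD_eq_getElem?_getD, List.getElem?_eq_none (by simpa [pvSweep] using hr : (pvSweep map rows cols dist).length ≤ p.1)]
      omega
  have hlt : ∃ p ∈ (List.range rows).flatMap (fun r => (List.range cols).map (fun c => (r, c))),
      (pvGet2 (pvSweep map rows cols dist) p.1 p.2).toNat < (pvGet2 dist p.1 p.2).toNat := by
    by_contra hno
    push_neg at hno
    apply hne
    apply pvEq_of_pointwise (rows := rows) (cols := cols) (by simp [pvSweep]) hinv'.2.1 h.1 h.2.1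
    intro r hr c hc
    have hmem : (r, c) ∈ (List.range rows).flatMap (fun r => (List.range cols).map (fun c => (r, c))) := by
      simp [List.mem_flatMap, List.mem_range]
      exact ⟨hr, hc⟩
    have h1 := hno (r, c) hmem
    dsimp only at h1
    rw [pvGet2_sweep map rows cols dist hr hc] at h1
    have h3 := pvRelax_le map rows cols dist r c
    have h4 := pvRelax_nonneg (map := map) h r c
    have h5 := pvGet2_nonneg h r c
    rw [pvGet2_sweep map rows cols dist hr hc]
    omega
  obtain ⟨p0, hp0mem, hp0⟩ := hlt
  unfold pvSumJ
  exact List.sum_lt_sum _ _ hle ⟨p0, hp0mem, hp0⟩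

-- B's 'while True' sweep loop: stop when the sweep is a fixpoint
def pvLoopJ (map : List (List String)) (rows cols : Nat)
    (dist : List (List Int)) (h : pvInvJ rows cols dist) : List (List Int) :=
  if hs : pvSweep map rows cols dist = dist then dist
  else pvLoopJ map rows cols (pvSweep map rows cols dist) (pvSweep_invJ map rows cols dist h)
termination_by pvSumJ rows cols dist
decreasing_by exact pvSweep_dec map rows cols dist h hs

-- B's initial field: 0 at the start, the sentinel inf everywhere else
def pvInitJ (rows cols : Nat) (s : Nat × Nat) (inf : Int) : List (List Int) :=
  (List.range rows).map (fun r => (List.range cols).map (fun c => if (r, c) = s then 0 else inf))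

theorem pvInvJ_init (rows cols : Nat) (s : Nat × Nat) (inf : Int) (hinf : 0 ≤ inf) :
    pvInvJ rows cols (pvInitJ rows cols s inf) := by
  refine ⟨by simp [pvInitJ], ?_, ?_⟩
  · intro row hrow
    simp only [pvInitJ, List.mem_map, List.mem_range] at hrow
    obtain ⟨r, -, hr⟩ := hrow
    simp [← hr]
  · intro row hrow v hv
    simp only [pvInitJ, List.mem_map, List.mem_range] at hrow
    obtain ⟨r, -, hr⟩ := hrow
    rw [← hr] at hv
    simp only [List.mem_map, List.mem_range] at hv
    obtain ⟨c, -, hc⟩ := hv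
    rw [← hc]
    split
    · exact le_refl _
    · exact hinf

-- B's final double loop with its early 'return -1' (none = returned -1)
def pvScanB (map : List (List String)) (rows cols : Nat) (inf : Int) (g : List (List Int)) : Int :=
  match (List.range rows).foldl (fun acc r => (List.range cols).foldl (fun acc c =>
      acc.bind (fun t =>
        if pvCell map r c = "G" then
          (if pvGet2 g r c = inf then none else some (t + pvGet2 g r c))
        else some t)) acc) (some (0 : Int)) with
  | none => -1
  | some t => t

def min_steps_to_deliver_alt (map : List (List String)) : Int :=
  match (List.range map.length).foldl (fun st r =>
      (List.range (map.headD []).length).foldl (fun st c =>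
        if pvCell map r c = "S" then some (r, c) else st) st) (none : Option (Nat × Nat)) with
  | none =>
    -- no 'S' found: with an empty first row B's Python never evaluates 'start' (its loops
    -- are all empty) and returns 0; otherwise it raises NameError (excluded by Pre_)
    if (map.headD []).length = 0 then 0 else -1
  | some s =>
    pvScanB map map.length (map.headD []).length ((map.length : Int) * ((map.headD []).length : Int))
      (pvLoopJ map map.length (map.headD []).length
        (pvInitJ map.length (map.headD []).length s ((map.length : Int) * ((map.headD []).length : Int)))
        (pvInvJ_init _ _ _ _ (by positivity)))

-- ===== PRECONDITION & SPEC =====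
-- the grid rectangle as a list of coordinates (used by Pre_ and the proofs)
def pvRect (rows cols : Nat) : List (Nat × Nat) :=
  (List.range rows).flatMap (fun r => (List.range cols).map (fun c => (r, c)))

-- Pre_ excludes exactly the inputs where the Python A raises: an empty map (IndexError on
-- map[0]), a row shorter than the first row (IndexError while scanning for 'S'), and a map
-- with no 'S' in the scanned rectangle (NameError: 'start' is never assigned).
def Pre_min_steps_to_deliver (map : List (List String)) : Prop :=
  map ≠ [] ∧ (∀ row ∈ map, (map.headD []).length ≤ row.length) ∧
    ∃ rc ∈ pvRect map.length (map.headD []).length, pvCell map rc.1 rc.2 = "S"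
instance (map : List (List String)) : Decidable (Pre_min_steps_to_deliver map) := by
  unfold Pre_min_steps_to_deliver; infer_instance

def pvWitness_min_steps_to_deliver : List (List String) := [["S", "G"]]

def Spec_min_steps_to_deliver (map : List (List String)) (out : Int) : Prop := out = min_steps_to_deliver_alt map
instance (map : List (List String)) (out : Int) : Decidable (Spec_min_steps_to_deliver map out) := by unfold Spec_min_steps_to_deliver; infer_instance

-- ===== CLAIM (what is proved, stated in full; the proofs are below) =====
def Claim_equal_min_steps_to_deliver : Prop := ∀ (map : List (List String)), Dom_min_steps_to_deliver map → Pre_min_steps_to_deliver map → Spec_min_steps_to_deliver map (min_steps_to_deliver map)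

-- ===== LEMMAS AND PROOFS =====

-- ----- proof-side intermediate: a level-synchronous BFS over a dict of distances -----
-- (used only by the proofs: A's queue BFS is first shown to fill the same distances as
-- this level BFS, whose final dict is then shown to be the fixpoint B's sweeps reach)

-- the four neighbour tuples in A's direction order
def pvNbrs (rc : Nat × Nat) : List (Int × Int) :=
  [((rc.1 : Int) + 1, (rc.2 : Int)), ((rc.1 : Int) - 1, (rc.2 : Int)),
   ((rc.1 : Int), (rc.2 : Int) + 1), ((rc.1 : Int), (rc.2 : Int) - 1)]

def pvStepL (map : List (List String)) (rows cols : Nat) (d : Int)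
    (st : PySem.Dict (Nat × Nat) Int × List (Nat × Nat)) (rc : Nat × Nat) :
    PySem.Dict (Nat × Nat) Int × List (Nat × Nat) :=
  (pvNbrs rc).foldl (fun st' p =>
    if 0 ≤ p.1 ∧ p.1 < (rows : Int) ∧ 0 ≤ p.2 ∧ p.2 < (cols : Int) ∧
       pvCell map p.1.toNat p.2.toNat ≠ "#" ∧ st'.1.get? (p.1.toNat, p.2.toNat) = none
    then (st'.1.insert (p.1.toNat, p.2.toNat) d, st'.2 ++ [(p.1.toNat, p.2.toNat)])
    else st') st

-- number of in-grid cells not yet in the dict (termination measure only)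
def pvCnL (rows cols : Nat) (dist : PySem.Dict (Nat × Nat) Int) : Nat :=
  (pvRect rows cols).countP (fun p => (dist.get? p).isNone)

theorem pvCountP_flip {α : Type} (L : List α) (p q : α → Bool) (x : α) (hx : x ∈ L)
    (himp : ∀ y, q y = true → p y = true) (hp : p x = true) (hq : q x = false) :
    L.countP q + 1 ≤ L.countP p := by
  induction L with
  | nil => simp at hx
  | cons a t ih =>
    rw [List.countP_cons, List.countP_cons]
    rcases List.mem_cons.mp hx with heq | hmem
    · subst heq
      have := List.countP_mono_left (l := t) (p := q) (q := p) (fun y _ hy => himp y hy)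
      simp [hp, hq]
      omega
    · have := ih hmem
      by_cases hqa : q a = true
      · simp [hqa, himp a hqa]; omega
      · simp [hqa]
        split <;> omega

theorem pvRect_mem (rows cols a b : Nat) :
    (a, b) ∈ pvRect rows cols ↔ a < rows ∧ b < cols := by
  simp [pvRect, List.mem_flatMap, List.mem_range]

theorem pvStepL_meas (map : List (List String)) (rows cols : Nat) (d : Int)
    (rc : Nat × Nat) (st : PySem.Dict (Nat × Nat) Int × List (Nat × Nat)) :
    pvCnL rows cols (pvStepL map rows cols d st rc).1 + (pvStepL map rows cols d st rc).2.length ≤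
      pvCnL rows cols st.1 + st.2.length := by
  unfold pvStepL
  generalize pvNbrs rc = ps
  induction ps generalizing st with
  | nil => exact le_refl _
  | cons p ps ih =>
    simp only [List.foldl_cons]
    by_cases hg : 0 ≤ p.1 ∧ p.1 < (rows : Int) ∧ 0 ≤ p.2 ∧ p.2 < (cols : Int) ∧
       pvCell map p.1.toNat p.2.toNat ≠ "#" ∧ st.1.get? (p.1.toNat, p.2.toNat) = none
    · rw [if_pos hg]
      obtain ⟨h1, h2, h3, h4, h5, h6⟩ := hg
      refine le_trans (ih _) ?_
      simp only [List.length_append, List.length_cons, List.length_nil]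
      have hmem : (p.1.toNat, p.2.toNat) ∈ pvRect rows cols := by
        rw [pvRect_mem]; omega
      have hflip : pvCnL rows cols (st.1.insert (p.1.toNat, p.2.toNat) d) + 1 ≤ pvCnL rows cols st.1 := by
        apply pvCountP_flip _ _ _ _ hmem
        · intro y hy
          simp only [Option.isNone_iff_eq_none] at hy ⊢
          rw [PySem.Dict.get?_insert] at hy
          split at hy
          · exact absurd hy (by simp)
          · exact hy
        · simp [Option.isNone_iff_eq_none, h6]
        · simp [Option.isNone_iff_eq_none, PySem.Dict.get?_insert]
      omega
    · rw [if_neg hg]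
      exact ih st

theorem pvLevelL_meas (map : List (List String)) (rows cols : Nat) (d : Int)
    (front : List (Nat × Nat)) (st : PySem.Dict (Nat × Nat) Int × List (Nat × Nat)) :
    pvCnL rows cols (front.foldl (pvStepL map rows cols d) st).1 +
      (front.foldl (pvStepL map rows cols d) st).2.length ≤
      pvCnL rows cols st.1 + st.2.length := by
  induction front generalizing st with
  | nil => exact le_refl _
  | cons rc rest ih =>
    simp only [List.foldl_cons]
    exact le_trans (ih _) (pvStepL_meas map rows cols d rc st)

theorem pvLoopL_dec (map : List (List String)) (rows cols : Nat) (d : Int)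
    (dist : PySem.Dict (Nat × Nat) Int) (rc : Nat × Nat) (rest : List (Nat × Nat)) :
    pvCnL rows cols (((rc :: rest).foldl (pvStepL map rows cols (d + 1)) (dist, [])).1) +
      (((rc :: rest).foldl (pvStepL map rows cols (d + 1)) (dist, [])).2).length <
      pvCnL rows cols dist + (rc :: rest).length := by
  have := pvLevelL_meas map rows cols (d + 1) (rc :: rest) (dist, [])
  simp only [List.length_cons, List.length_nil] at this ⊢
  omega

-- the level-synchronous loop: process the whole frontier, then recurse on the next wave
def pvLoopL (map : List (List String)) (rows cols : Nat)
    (dist : PySem.Dict (Nat × Nat) Int) (front : List (Nat × Nat)) (d : Int) :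
    PySem.Dict (Nat × Nat) Int :=
  match front with
  | [] => dist
  | rc :: rest =>
    pvLoopL map rows cols
      (((rc :: rest).foldl (pvStepL map rows cols (d + 1)) (dist, [])).1)
      (((rc :: rest).foldl (pvStepL map rows cols (d + 1)) (dist, [])).2) (d + 1)
termination_by pvCnL rows cols dist + front.length
decreasing_by exact pvLoopL_dec map rows cols d dist rc rest

-- ----- pointwise grid lemmas -----

theorem pvGet2_set2_self (g : List (List Int)) (r c : Nat) (v : Int)
    (hr : r < g.length) (hc : c < g[r].length) : pvGet2 (pvSet2 g r c v) r c = v := by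
  unfold pvGet2 pvSet2
  have hrow : g.getD r [] = g[r] := by simp [List.getD_eq_getElem?_getD, List.getElem?_eq_getElem hr]
  rw [hrow]
  simp [List.getD_eq_getElem?_getD, List.getElem?_set, hr, hc]

theorem pvGet2_set2_ne (g : List (List Int)) (r c : Nat) (v : Int) (r' c' : Nat)
    (hne : (r', c') ≠ (r, c)) : pvGet2 (pvSet2 g r c v) r' c' = pvGet2 g r' c' := by
  unfold pvGet2 pvSet2
  by_cases hrr : r' = r
  · subst hrr
    have hcc : c ≠ c' := by intro h; exact hne (by rw [h])
    rcases Nat.lt_or_ge r' g.length with hr | hr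
    · have hrow : g.getD r' [] = g[r'] := by
        simp [List.getD_eq_getElem?_getD, List.getElem?_eq_getElem hr]
      rw [hrow]
      simp [List.getD_eq_getElem?_getD, List.getElem?_set, hr, hcc]
    · rw [List.set_eq_of_length_le hr]
  · have hrr' : r ≠ r' := fun h => hrr h.symm
    simp [List.getD_eq_getElem?_getD, List.getElem?_set, hrr']

-- ----- the A step re-expressed over the same neighbour list the level BFS uses -----

def pvBodyA (map : List (List String)) (rows cols : Nat) (rc : Nat × Nat)
    (st' : List (List Int) × List (Nat × Nat)) (p : Int × Int) : List (List Int) × List (Nat × Nat) :=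
  if 0 ≤ p.1 ∧ p.1 < (rows : Int) ∧ 0 ≤ p.2 ∧ p.2 < (cols : Int) ∧
     pvCell map p.1.toNat p.2.toNat ≠ "#" ∧ pvGet2 st'.1 p.1.toNat p.2.toNat = -1
  then (pvSet2 st'.1 p.1.toNat p.2.toNat (pvGet2 st'.1 rc.1 rc.2 + 1), st'.2 ++ [(p.1.toNat, p.2.toNat)])
  else st'

def pvBodyL (map : List (List String)) (rows cols : Nat) (d : Int)
    (st' : PySem.Dict (Nat × Nat) Int × List (Nat × Nat)) (p : Int × Int) :
    PySem.Dict (Nat × Nat) Int × List (Nat × Nat) :=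
  if 0 ≤ p.1 ∧ p.1 < (rows : Int) ∧ 0 ≤ p.2 ∧ p.2 < (cols : Int) ∧
     pvCell map p.1.toNat p.2.toNat ≠ "#" ∧ st'.1.get? (p.1.toNat, p.2.toNat) = none
  then (st'.1.insert (p.1.toNat, p.2.toNat) d, st'.2 ++ [(p.1.toNat, p.2.toNat)])
  else st'

theorem pvStepA_eq (map : List (List String)) (rows cols : Nat)
    (st : List (List Int) × List (Nat × Nat)) (rc : Nat × Nat) :
    pvStepA map rows cols st rc = (pvNbrs rc).foldl (pvBodyA map rows cols rc) st := by
  simp [pvStepA, pvNbrs, pvDirs, pvBodyA, sub_eq_add_neg]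

theorem pvStepL_eq (map : List (List String)) (rows cols : Nat) (d : Int)
    (st : PySem.Dict (Nat × Nat) Int × List (Nat × Nat)) (rc : Nat × Nat) :
    pvStepL map rows cols d st rc = (pvNbrs rc).foldl (pvBodyL map rows cols d) st := rfl

-- ----- the cross relation between A's grid and the level-BFS dict -----

def pvRel (rows cols : Nat) (g : List (List Int)) (dist : PySem.Dict (Nat × Nat) Int) : Prop :=
  (∀ r c : Nat, r < rows → c < cols → pvGet2 g r c = dist.getD (r, c) (-1)) ∧
    (∀ p ∈ dist.items, (0 : Int) ≤ p.2)

theorem pvRel_none_iff {rows cols : Nat} {g : List (List Int)} {dist : PySem.Dict (Nat × Nat) Int}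
    (h : pvRel rows cols g dist) {r c : Nat} (hr : r < rows) (hc : c < cols) :
    dist.get? (r, c) = none ↔ pvGet2 g r c = -1 := by
  constructor
  · intro hn
    rw [h.1 r c hr hc, PySem.Dict.getD_eq_get?_getD, hn]
    rfl
  · intro hg
    cases hv : dist.get? (r, c) with
    | none => rfl
    | some v =>
      have hmem := PySem.Dict.mem_items_of_get?_eq_some dist hv
      have hge := h.2 _ hmem
      rw [h.1 r c hr hc, PySem.Dict.getD_eq_get?_getD, hv] at hg
      simp at hg
      omega

-- one neighbour of one frontier cell: the two step bodies stay in lock-step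
theorem pvCrossNbr (map : List (List String)) (rows cols : Nat) (rc : Nat × Nat) (d : Int)
    (hd : 0 ≤ d) (stA : List (List Int) × List (Nat × Nat))
    (stB : PySem.Dict (Nat × Nat) Int × List (Nat × Nat)) (p : Int × Int)
    (hq : stA.2 = stB.2)
    (hInv : pvInvA rows cols stA.1) (hRel : pvRel rows cols stA.1 stB.1)
    (hrc : pvGet2 stA.1 rc.1 rc.2 = d) :
    (pvBodyA map rows cols rc stA p).2 = (pvBodyL map rows cols (d + 1) stB p).2 ∧
    pvInvA rows cols (pvBodyA map rows cols rc stA p).1 ∧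
    pvRel rows cols (pvBodyA map rows cols rc stA p).1 (pvBodyL map rows cols (d + 1) stB p).1 ∧
    (∀ r c : Nat, pvGet2 stA.1 r c ≠ -1 →
      pvGet2 (pvBodyA map rows cols rc stA p).1 r c = pvGet2 stA.1 r c) ∧
    (∀ x ∈ (pvBodyA map rows cols rc stA p).2,
      x ∈ stA.2 ∨ (x.1 < rows ∧ x.2 < cols ∧
        pvGet2 (pvBodyA map rows cols rc stA p).1 x.1 x.2 = d + 1)) := by
  unfold pvBodyA pvBodyL
  by_cases hb : 0 ≤ p.1 ∧ p.1 < (rows : Int) ∧ 0 ≤ p.2 ∧ p.2 < (cols : Int) ∧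
      pvCell map p.1.toNat p.2.toNat ≠ "#"
  · obtain ⟨h1, h2, h3, h4, h5⟩ := hb
    have hnr : p.1.toNat < rows := by omega
    have hnc : p.2.toNat < cols := by omega
    have hiff := pvRel_none_iff hRel hnr hnc
    by_cases hfree : pvGet2 stA.1 p.1.toNat p.2.toNat = -1
    · rw [if_pos ⟨h1, h2, h3, h4, h5, hfree⟩, if_pos ⟨h1, h2, h3, h4, h5, hiff.mpr hfree⟩, hrc]
      have hrlen : p.1.toNat < stA.1.length := by rw [hInv.1]; exact hnr
      have hclen : p.2.toNat < stA.1[p.1.toNat].length := by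
        rw [hInv.2.1 _ (List.getElem_mem hrlen)]; exact hnc
      have hself := pvGet2_set2_self stA.1 p.1.toNat p.2.toNat (d + 1) hrlen hclen
      refine ⟨by rw [hq], pvInvA_set2 hInv _ _ _ (by omega), ⟨?_, ?_⟩, ?_, ?_⟩
      · intro r c hr hc
        by_cases hx : (r, c) = (p.1.toNat, p.2.toNat)
        · obtain ⟨hx1, hx2⟩ := Prod.mk.injEq .. ▸ hx
          subst hx1; subst hx2
          rw [hself, PySem.Dict.getD_insert]
          simp
        · rw [pvGet2_set2_ne _ _ _ _ _ _ hx, PySem.Dict.getD_insert, if_neg hx]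
          exact hRel.1 r c hr hc
      · intro x hx
        rw [PySem.Dict.mem_items_insert] at hx
        rcases hx with hx | ⟨hx, -⟩
        · rw [hx]; show (0 : Int) ≤ d + 1; omega
        · exact hRel.2 _ hx
      · intro r c hne
        apply pvGet2_set2_ne
        intro hx
        obtain ⟨hx1, hx2⟩ := Prod.mk.injEq .. ▸ hx
        subst hx1; subst hx2
        exact hne hfree
      · intro x hx
        rcases List.mem_append.mp hx with hx | hx
        · exact Or.inl hx
        · right
          simp only [List.mem_singleton] at hx
          subst hx
          exact ⟨hnr, hnc, hself⟩
    · rw [if_neg (by intro hg; exact hfree hg.2.2.2.2.2),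
          if_neg (by intro hg; exact hfree (hiff.mp hg.2.2.2.2.2))]
      exact ⟨hq, hInv, hRel, fun _ _ _ => rfl, fun x hx => Or.inl hx⟩
  · rw [if_neg (by intro hg; exact hb ⟨hg.1, hg.2.1, hg.2.2.1, hg.2.2.2.1, hg.2.2.2.2.1⟩),
        if_neg (by intro hg; exact hb ⟨hg.1, hg.2.1, hg.2.2.1, hg.2.2.2.1, hg.2.2.2.2.1⟩)]
    exact ⟨hq, hInv, hRel, fun _ _ _ => rfl, fun x hx => Or.inl hx⟩

-- all four neighbours of one frontier cell
theorem pvCrossNbrs (map : List (List String)) (rows cols : Nat) (rc : Nat × Nat) (d : Int)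
    (hd : 0 ≤ d) (ps : List (Int × Int)) :
    ∀ (stA : List (List Int) × List (Nat × Nat))
      (stB : PySem.Dict (Nat × Nat) Int × List (Nat × Nat)),
    stA.2 = stB.2 → pvInvA rows cols stA.1 → pvRel rows cols stA.1 stB.1 →
    pvGet2 stA.1 rc.1 rc.2 = d →
    (∀ x ∈ stA.2, x.1 < rows ∧ x.2 < cols ∧ pvGet2 stA.1 x.1 x.2 = d + 1) →
    (ps.foldl (pvBodyA map rows cols rc) stA).2 = (ps.foldl (pvBodyL map rows cols (d + 1)) stB).2 ∧
    pvInvA rows cols (ps.foldl (pvBodyA map rows cols rc) stA).1 ∧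
    pvRel rows cols (ps.foldl (pvBodyA map rows cols rc) stA).1
      (ps.foldl (pvBodyL map rows cols (d + 1)) stB).1 ∧
    (∀ r c : Nat, pvGet2 stA.1 r c ≠ -1 →
      pvGet2 (ps.foldl (pvBodyA map rows cols rc) stA).1 r c = pvGet2 stA.1 r c) ∧
    (∀ x ∈ (ps.foldl (pvBodyA map rows cols rc) stA).2,
      x.1 < rows ∧ x.2 < cols ∧
        pvGet2 (ps.foldl (pvBodyA map rows cols rc) stA).1 x.1 x.2 = d + 1) := by
  induction ps with
  | nil =>
    intro stA stB hq hInv hRel hrc hacc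
    exact ⟨hq, hInv, hRel, fun _ _ _ => rfl, hacc⟩
  | cons p ps ih =>
    intro stA stB hq hInv hRel hrc hacc
    simp only [List.foldl_cons]
    obtain ⟨hq2, hInv1, hRel1, hpres1, hnew1⟩ :=
      pvCrossNbr map rows cols rc d hd stA stB p hq hInv hRel hrc
    have hrc1 : pvGet2 (pvBodyA map rows cols rc stA p).1 rc.1 rc.2 = d := by
      rw [hpres1 rc.1 rc.2 (by rw [hrc]; omega), hrc]
    have hacc1 : ∀ x ∈ (pvBodyA map rows cols rc stA p).2,
        x.1 < rows ∧ x.2 < cols ∧ pvGet2 (pvBodyA map rows cols rc stA p).1 x.1 x.2 = d + 1 := by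
      intro x hx
      rcases hnew1 x hx with hmem | hfresh
      · obtain ⟨ha, hb, hc⟩ := hacc x hmem
        exact ⟨ha, hb, by rw [hpres1 x.1 x.2 (by rw [hc]; omega), hc]⟩
      · exact hfresh
    obtain ⟨c1, c2, c3, c4, c5⟩ := ih _ _ hq2 hInv1 hRel1 hrc1 hacc1
    refine ⟨c1, c2, c3, ?_, c5⟩
    intro r c hne
    rw [c4 r c (by rw [hpres1 r c hne]; exact hne), hpres1 r c hne]

-- one whole BFS level, A's queue-step against the level step
theorem pvCrossLevel (map : List (List String)) (rows cols : Nat) (d : Int) (hd : 0 ≤ d)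
    (front : List (Nat × Nat)) :
    ∀ (stA : List (List Int) × List (Nat × Nat))
      (stB : PySem.Dict (Nat × Nat) Int × List (Nat × Nat)),
    stA.2 = stB.2 → pvInvA rows cols stA.1 → pvRel rows cols stA.1 stB.1 →
    (∀ x ∈ front, x.1 < rows ∧ x.2 < cols ∧ pvGet2 stA.1 x.1 x.2 = d) →
    (∀ x ∈ stA.2, x.1 < rows ∧ x.2 < cols ∧ pvGet2 stA.1 x.1 x.2 = d + 1) →
    (front.foldl (pvStepA map rows cols) stA).2 =
      (front.foldl (pvStepL map rows cols (d + 1)) stB).2 ∧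
    pvInvA rows cols (front.foldl (pvStepA map rows cols) stA).1 ∧
    pvRel rows cols (front.foldl (pvStepA map rows cols) stA).1
      (front.foldl (pvStepL map rows cols (d + 1)) stB).1 ∧
    (∀ x ∈ (front.foldl (pvStepA map rows cols) stA).2,
      x.1 < rows ∧ x.2 < cols ∧
        pvGet2 (front.foldl (pvStepA map rows cols) stA).1 x.1 x.2 = d + 1) := by
  induction front with
  | nil =>
    intro stA stB hq hInv hRel _ hacc
    exact ⟨hq, hInv, hRel, hacc⟩
  | cons rc rest ih =>
    intro stA stB hq hInv hRel hfront hacc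
    simp only [List.foldl_cons, pvStepA_eq, pvStepL_eq]
    obtain ⟨hrc1, hrc2, hrc3⟩ := hfront rc (by simp)
    obtain ⟨c1, c2, c3, c4, c5⟩ :=
      pvCrossNbrs map rows cols rc d hd (pvNbrs rc) stA stB hq hInv hRel hrc3 hacc
    have hfront' : ∀ x ∈ rest, x.1 < rows ∧ x.2 < cols ∧
        pvGet2 ((pvNbrs rc).foldl (pvBodyA map rows cols rc) stA).1 x.1 x.2 = d := by
      intro x hx
      obtain ⟨ha, hb, hc⟩ := hfront x (by simp [hx])
      exact ⟨ha, hb, by rw [c4 x.1 x.2 (by rw [hc]; omega), hc]⟩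
    have := ih _ _ c1 c2 c3 hfront' c5
    simp only [pvStepA_eq, pvStepL_eq] at this
    exact this

-- ----- restructuring A's FIFO queue into levels -----

-- A's step only appends to the queue, and the grid part ignores the queue
theorem pvStepA_append (map : List (List String)) (rows cols : Nat) (rc : Nat × Nat)
    (g : List (List Int)) (q : List (Nat × Nat)) :
    pvStepA map rows cols (g, q) rc =
      ((pvStepA map rows cols (g, []) rc).1, q ++ (pvStepA map rows cols (g, []) rc).2) := by
  rw [pvStepA_eq, pvStepA_eq]
  generalize pvNbrs rc = ps
  induction ps generalizing g q with
  | nil => simp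
  | cons p ps ih =>
    simp only [List.foldl_cons]
    by_cases hg : 0 ≤ p.1 ∧ p.1 < (rows : Int) ∧ 0 ≤ p.2 ∧ p.2 < (cols : Int) ∧
       pvCell map p.1.toNat p.2.toNat ≠ "#" ∧ pvGet2 g p.1.toNat p.2.toNat = -1
    · have e1 : pvBodyA map rows cols rc (g, q) p =
          (pvSet2 g p.1.toNat p.2.toNat (pvGet2 g rc.1 rc.2 + 1), q ++ [(p.1.toNat, p.2.toNat)]) := by
        unfold pvBodyA
        rw [if_pos hg]
      have e2 : pvBodyA map rows cols rc (g, []) p =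
          (pvSet2 g p.1.toNat p.2.toNat (pvGet2 g rc.1 rc.2 + 1), [] ++ [(p.1.toNat, p.2.toNat)]) := by
        unfold pvBodyA
        rw [if_pos hg]
      rw [e1, e2]
      rw [ih, ih _ ([] ++ [(p.1.toNat, p.2.toNat)])]
      simp
    · have e1 : pvBodyA map rows cols rc (g, q) p = (g, q) := by
        unfold pvBodyA
        rw [if_neg hg]
      have e2 : pvBodyA map rows cols rc (g, []) p = (g, []) := by
        unfold pvBodyA
        rw [if_neg hg]
      rw [e1, e2]
      exact ih g q

theorem pvFoldA_inv (map : List (List String)) (rows cols : Nat) (front : List (Nat × Nat)) :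
    ∀ st, pvInvA rows cols st.1 → pvInvA rows cols (front.foldl (pvStepA map rows cols) st).1 := by
  induction front with
  | nil => intro st h; exact h
  | cons rc rest ih =>
    intro st h
    simp only [List.foldl_cons]
    exact ih _ (pvStepA_meas map rows cols st rc h).1

theorem pvLoopA_congr (map : List (List String)) (rows cols : Nat)
    {g g' : List (List Int)} {q q' : List (Nat × Nat)} (hg : g = g') (hq : q = q')
    (h : pvInvA rows cols g) (h' : pvInvA rows cols g') :
    pvLoopA map rows cols g q h = pvLoopA map rows cols g' q' h' := by
  subst hg; subst hq; rfl

-- processing "front ++ acc" with A's queue equals processing the whole level first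
theorem pvL1 (map : List (List String)) (rows cols : Nat) :
    ∀ (front acc : List (Nat × Nat)) (g : List (List Int)) (h : pvInvA rows cols g)
      (h2 : pvInvA rows cols (front.foldl (pvStepA map rows cols) (g, acc)).1),
    pvLoopA map rows cols g (front ++ acc) h =
      pvLoopA map rows cols (front.foldl (pvStepA map rows cols) (g, acc)).1
        (front.foldl (pvStepA map rows cols) (g, acc)).2 h2 := by
  intro front
  induction front with
  | nil => intro acc g h h2; rfl
  | cons rc rest ih =>
    intro acc g h h2
    rw [List.cons_append, pvLoopA]
    have hstep := pvStepA_append map rows cols rc g (rest ++ acc)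
    have hstep2 := pvStepA_append map rows cols rc g acc
    have hq : (pvStepA map rows cols (g, rest ++ acc) rc).2 =
        rest ++ (acc ++ (pvStepA map rows cols (g, []) rc).2) := by
      rw [hstep]; simp
    have hg : (pvStepA map rows cols (g, rest ++ acc) rc).1 = (pvStepA map rows cols (g, acc) rc).1 := by
      rw [hstep, hstep2]
    have h3 : pvInvA rows cols (pvStepA map rows cols (g, rest ++ acc) rc).1 :=
      (pvStepA_meas map rows cols (g, rest ++ acc) rc h).1
    have hfold : rest.foldl (pvStepA map rows cols)
        ((pvStepA map rows cols (g, rest ++ acc) rc).1, acc ++ (pvStepA map rows cols (g, []) rc).2) =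
        (rc :: rest).foldl (pvStepA map rows cols) (g, acc) := by
      simp only [List.foldl_cons]
      congr 1
      rw [hg, hstep2]
    have h4 : pvInvA rows cols (rest.foldl (pvStepA map rows cols)
        ((pvStepA map rows cols (g, rest ++ acc) rc).1,
          acc ++ (pvStepA map rows cols (g, []) rc).2)).1 := by
      rw [hfold]; exact h2
    have := ih (acc ++ (pvStepA map rows cols (g, []) rc).2)
      (pvStepA map rows cols (g, rest ++ acc) rc).1 h3 h4
    rw [hq] at *
    rw [this]
    exact pvLoopA_congr map rows cols (congrArg Prod.fst hfold) (congrArg Prod.snd hfold) _ _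

-- ----- the two BFS loops agree level by level -----

theorem pvMainLoop (map : List (List String)) (rows cols : Nat) :
    ∀ (n : Nat) (g : List (List Int)) (dist : PySem.Dict (Nat × Nat) Int)
      (front : List (Nat × Nat)) (d : Int) (h : pvInvA rows cols g),
    pvCnL rows cols dist + front.length ≤ n →
    pvRel rows cols g dist →
    (∀ x ∈ front, x.1 < rows ∧ x.2 < cols ∧ pvGet2 g x.1 x.2 = d) →
    0 ≤ d →
    pvRel rows cols (pvLoopA map rows cols g front h) (pvLoopL map rows cols dist front d) := by
  intro n
  induction n with
  | zero =>
    intro g dist front d h hn hRel hfront hd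
    have : front = [] := by
      cases front with
      | nil => rfl
      | cons a l => simp at hn
    subst this
    rw [pvLoopA, pvLoopL]
    exact hRel
  | succ n ihn =>
    intro g dist front d h hn hRel hfront hd
    cases front with
    | nil =>
      rw [pvLoopA, pvLoopL]
      exact hRel
    | cons rc rest =>
      obtain ⟨c1, c2, c3, c4⟩ :=
        pvCrossLevel map rows cols d hd (rc :: rest) (g, []) (dist, []) rfl h hRel hfront (by simp)
      have hmeas := pvLevelL_meas map rows cols (d + 1) (rc :: rest) (dist, [])
      have hL1 := pvL1 map rows cols (rc :: rest) [] g h (by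
        exact pvFoldA_inv map rows cols (rc :: rest) (g, []) h)
      rw [List.append_nil] at hL1
      rw [hL1, pvLoopL]
      rw [c1]
      apply ihn
      · simp only [List.length_nil, List.length_cons] at hmeas hn ⊢
        omega
      · exact c3
      · rw [← c1]; exact c4
      · omega

-- ----- grid adjacency and the neighbour lists -----

def pvAdj (a b : Nat × Nat) : Prop :=
  (a.1 = b.1 ∧ (a.2 = b.2 + 1 ∨ b.2 = a.2 + 1)) ∨ (a.2 = b.2 ∧ (a.1 = b.1 + 1 ∨ b.1 = a.1 + 1))

theorem pvAdj_symm {a b : Nat × Nat} (h : pvAdj a b) : pvAdj b a := by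
  unfold pvAdj at *; omega

theorem pvNbrs_adj (rc : Nat × Nat) (p : Int × Int) (hp : p ∈ pvNbrs rc)
    (h1 : 0 ≤ p.1) (h2 : 0 ≤ p.2) : pvAdj rc (p.1.toNat, p.2.toNat) := by
  simp only [pvNbrs, List.mem_cons, List.not_mem_nil, or_false] at hp
  rcases hp with h | h | h | h <;> subst h <;> simp only [pvAdj] <;> omega

theorem pvNbrs2_adj (r c : Nat) (p : Int × Int) (hp : p ∈ pvNbrs2 r c)
    (h1 : 0 ≤ p.1) (h2 : 0 ≤ p.2) : pvAdj (r, c) (p.1.toNat, p.2.toNat) := by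
  simp only [pvNbrs2, List.mem_cons, List.not_mem_nil, or_false] at hp
  rcases hp with h | h | h | h <;> subst h <;> simp only [pvAdj] <;> omega

theorem pvAdj_mem_nbrs (rc n : Nat × Nat) (h : pvAdj rc n) :
    ∃ p ∈ pvNbrs rc, 0 ≤ p.1 ∧ 0 ≤ p.2 ∧ p.1.toNat = n.1 ∧ p.2.toNat = n.2 := by
  rcases h with ⟨h1, h2 | h2⟩ | ⟨h1, h2 | h2⟩
  · exact ⟨((rc.1 : Int), (rc.2 : Int) - 1), by simp [pvNbrs], by omega, by omega, by omega, by omega⟩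
  · exact ⟨((rc.1 : Int), (rc.2 : Int) + 1), by simp [pvNbrs], by omega, by omega, by omega, by omega⟩
  · exact ⟨((rc.1 : Int) - 1, (rc.2 : Int)), by simp [pvNbrs], by omega, by omega, by omega, by omega⟩
  · exact ⟨((rc.1 : Int) + 1, (rc.2 : Int)), by simp [pvNbrs], by omega, by omega, by omega, by omega⟩

theorem pvAdj_mem_nbrs2 (r c : Nat) (n : Nat × Nat) (h : pvAdj (r, c) n) :
    ∃ p ∈ pvNbrs2 r c, 0 ≤ p.1 ∧ 0 ≤ p.2 ∧ p.1.toNat = n.1 ∧ p.2.toNat = n.2 := by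
  rcases h with ⟨h1, h2 | h2⟩ | ⟨h1, h2 | h2⟩
  · exact ⟨((r : Int), (c : Int) - 1), by simp [pvNbrs2], by omega, by omega, by omega, by omega⟩
  · exact ⟨((r : Int), (c : Int) + 1), by simp [pvNbrs2], by omega, by omega, by omega, by omega⟩
  · exact ⟨((r : Int) - 1, (c : Int)), by simp [pvNbrs2], by omega, by omega, by omega, by omega⟩
  · exact ⟨((r : Int) + 1, (c : Int)), by simp [pvNbrs2], by omega, by omega, by omega, by omega⟩

-- ----- structural invariants of the level-BFS dict -----

-- facts about the dict that survive to the end of the BFS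
structure pvLG (map : List (List String)) (rows cols : Nat) (s : Nat × Nat)
    (dist : PySem.Dict (Nat × Nat) Int) : Prop where
  nodup : dist.keys.Nodup
  start0 : dist.get? s = some 0
  inRect : ∀ p ∈ dist.items, p.1.1 < rows ∧ p.1.2 < cols
  nonneg : ∀ p ∈ dist.items, 0 ≤ p.2
  ltLen : ∀ p ∈ dist.items, p.2 < (dist.items.length : Int)
  zeroS : ∀ p ∈ dist.items, p.2 = 0 → p.1 = s
  supp : ∀ p ∈ dist.items, 1 ≤ p.2 →
    pvCell map p.1.1 p.1.2 ≠ "#" ∧ ∃ n, pvAdj p.1 n ∧ dist.get? n = some (p.2 - 1)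

-- the loop invariant between levels
structure pvLS (map : List (List String)) (rows cols : Nat) (s : Nat × Nat) (d : Int)
    (dist : PySem.Dict (Nat × Nat) Int) (front : List (Nat × Nat)) : Prop where
  base : pvLG map rows cols s dist
  dpos : 0 ≤ d
  leD : ∀ p ∈ dist.items, p.2 ≤ d
  frontVal : ∀ x ∈ front, dist.get? x = some d
  covered : ∀ p ∈ dist.items, p.1 ∉ front →
    ∀ n, pvAdj p.1 n → n.1 < rows → n.2 < cols → pvCell map n.1 n.2 ≠ "#" →
      ∃ v, dist.get? n = some v ∧ v ≤ p.2 + 1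

-- the invariant while one level (list 'todo' still unprocessed) is being expanded
structure pvLM (map : List (List String)) (rows cols : Nat) (s : Nat × Nat) (d : Int)
    (st : PySem.Dict (Nat × Nat) Int × List (Nat × Nat)) (todo : List (Nat × Nat)) : Prop where
  base : pvLG map rows cols s st.1
  dpos : 0 ≤ d
  leD1 : ∀ p ∈ st.1.items, p.2 ≤ d + 1
  todoVal : ∀ x ∈ todo, st.1.get? x = some d
  accVal : ∀ x ∈ st.2, st.1.get? x = some (d + 1)
  covered : ∀ p ∈ st.1.items, p.1 ∉ todo → p.1 ∉ st.2 →
    ∀ n, pvAdj p.1 n → n.1 < rows → n.2 < cols → pvCell map n.1 n.2 ≠ "#" →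
      ∃ v, st.1.get? n = some v ∧ v ≤ p.2 + 1

-- the invariant while the neighbour list 'ps' of one cell 'rc' is being expanded
structure pvLN (map : List (List String)) (rows cols : Nat) (s : Nat × Nat) (d : Int)
    (rc : Nat × Nat) (st : PySem.Dict (Nat × Nat) Int × List (Nat × Nat))
    (rem : List (Nat × Nat)) (ps : List (Int × Int)) : Prop where
  base : pvLG map rows cols s st.1
  dpos : 0 ≤ d
  leD1 : ∀ p ∈ st.1.items, p.2 ≤ d + 1
  remVal : ∀ x ∈ rem, st.1.get? x = some d
  accVal : ∀ x ∈ st.2, st.1.get? x = some (d + 1)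
  rcVal : st.1.get? rc = some d
  covered : ∀ p ∈ st.1.items, p.1 ∉ rem → p.1 ∉ st.2 → p.1 ≠ rc →
    ∀ n, pvAdj p.1 n → n.1 < rows → n.2 < cols → pvCell map n.1 n.2 ≠ "#" →
      ∃ v, st.1.get? n = some v ∧ v ≤ p.2 + 1
  rcCov : ∀ n : Nat × Nat, pvAdj rc n → n.1 < rows → n.2 < cols → pvCell map n.1 n.2 ≠ "#" →
    (∃ v, st.1.get? n = some v ∧ v ≤ d + 1) ∨
    (∃ p ∈ ps, 0 ≤ p.1 ∧ 0 ≤ p.2 ∧ p.1.toNat = n.1 ∧ p.2.toNat = n.2)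

theorem pvLN_step (map : List (List String)) (rows cols : Nat) (s : Nat × Nat) (d : Int)
    (rc : Nat × Nat) (st : PySem.Dict (Nat × Nat) Int × List (Nat × Nat))
    (rem : List (Nat × Nat)) (p : Int × Int) (ps : List (Int × Int))
    (hp : p ∈ pvNbrs rc)
    (h : pvLN map rows cols s d rc st rem (p :: ps)) :
    pvLN map rows cols s d rc (pvBodyL map rows cols (d + 1) st p) rem ps := by
  unfold pvBodyL
  by_cases hg : 0 ≤ p.1 ∧ p.1 < (rows : Int) ∧ 0 ≤ p.2 ∧ p.2 < (cols : Int) ∧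
      pvCell map p.1.toNat p.2.toNat ≠ "#" ∧ st.1.get? (p.1.toNat, p.2.toNat) = none
  · rw [if_pos hg]
    obtain ⟨h1, h2, h3, h4, h5, h6⟩ := hg
    set key : Nat × Nat := (p.1.toNat, p.2.toNat) with hkey
    have hfreshc : st.1.contains key = false := by
      rw [PySem.Dict.contains_eq_isSome_get?, h6]; rfl
    have hitems : (st.1.insert key (d + 1)).items = st.1.items ++ [(key, d + 1)] := by
      rw [PySem.Dict.items_insert, hfreshc]
      simp
    have hget_pres : ∀ (k : Nat × Nat) (v : Int), st.1.get? k = some v →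
        (st.1.insert key (d + 1)).get? k = some v := by
      intro k v hk
      rw [PySem.Dict.get?_insert]
      split
      · next heq => rw [heq] at hk; rw [hk] at h6; exact absurd h6 (by simp)
      · exact hk
    have hget_new : (st.1.insert key (d + 1)).get? key = some (d + 1) :=
      PySem.Dict.get?_insert_self _ _ _
    have hmem_iff : ∀ q, q ∈ (st.1.insert key (d + 1)).items ↔
        q ∈ st.1.items ∨ q = (key, d + 1) := by
      intro q
      rw [hitems]
      simp [List.mem_append]
    have hrc_item : (rc, d) ∈ st.1.items := PySem.Dict.mem_items_of_get?_eq_some _ h.rcVal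
    have hdlt : d < (st.1.items.length : Int) := h.base.ltLen _ hrc_item
    refine ⟨⟨?_, ?_, ?_, ?_, ?_, ?_, ?_⟩, h.dpos, ?_, ?_, ?_, ?_, ?_, ?_⟩
    · exact PySem.Dict.nodup_keys_insert _ _ _ h.base.nodup
    · exact hget_pres _ _ h.base.start0
    · intro q hq
      rcases (hmem_iff q).mp hq with hq | hq
      · exact h.base.inRect _ hq
      · subst hq
        exact ⟨by show p.1.toNat < rows; omega, by show p.2.toNat < cols; omega⟩
    · intro q hq
      rcases (hmem_iff q).mp hq with hq | hq
      · exact h.base.nonneg _ hq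
      · subst hq; show (0 : Int) ≤ d + 1; have := h.dpos; omega
    · intro q hq
      rw [hitems, List.length_append, List.length_cons, List.length_nil]
      rcases (hmem_iff q).mp hq with hq | hq
      · have := h.base.ltLen _ hq; push_cast at this ⊢; omega
      · subst hq
        show (d + 1 : Int) < ((st.1.items.length + (1 + 0) : Nat) : Int)
        push_cast
        omega
    · intro q hq hq0
      rcases (hmem_iff q).mp hq with hq | hq
      · exact h.base.zeroS _ hq hq0
      · subst hq
        exfalso
        have hq0' : (d + 1 : Int) = 0 := hq0
        have := h.dpos
        omega
    · intro q hq hq1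
      rcases (hmem_iff q).mp hq with hq | hq
      · obtain ⟨hopen, n, hadj, hn⟩ := h.base.supp _ hq hq1
        exact ⟨hopen, n, hadj, hget_pres _ _ hn⟩
      · subst hq
        refine ⟨h5, rc, ?_, ?_⟩
        · exact pvAdj_symm (pvNbrs_adj rc p hp h1 h3)
        · have : (d + 1 - 1 : Int) = d := by ring
          simp only [this]
          exact hget_pres _ _ h.rcVal
    · intro q hq
      rcases (hmem_iff q).mp hq with hq | hq
      · exact h.leD1 _ hq
      · subst hq; exact le_of_eq rfl
    · intro x hx; exact hget_pres _ _ (h.remVal x hx)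
    · intro x hx
      rcases List.mem_append.mp hx with hx | hx
      · exact hget_pres _ _ (h.accVal x hx)
      · simp only [List.mem_singleton] at hx; subst hx; exact hget_new
    · exact hget_pres _ _ h.rcVal
    · intro q hq hq1 hq2 hq3 n hadj hn1 hn2 hn3
      have hq2' : q.1 ∉ st.2 := fun hmem => hq2 (List.mem_append.mpr (Or.inl hmem))
      rcases (hmem_iff q).mp hq with hq | hq
      · obtain ⟨v, hv, hvle⟩ := h.covered _ hq hq1 hq2' hq3 n hadj hn1 hn2 hn3
        exact ⟨v, hget_pres _ _ hv, hvle⟩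
      · exfalso
        apply hq2
        apply List.mem_append.mpr (Or.inr _)
        simp [hq]
    · intro n hadj hn1 hn2 hn3
      rcases h.rcCov n hadj hn1 hn2 hn3 with ⟨v, hv, hvle⟩ | ⟨q, hqmem, hq1, hq2, hq3, hq4⟩
      · exact Or.inl ⟨v, hget_pres _ _ hv, hvle⟩
      · rcases List.mem_cons.mp hqmem with hq | hq
        · subst hq
          left
          refine ⟨d + 1, ?_, le_refl _⟩
          have : n = key := by
            obtain ⟨n1, n2⟩ := n
            simp only [hkey, Prod.mk.injEq]
            exact ⟨hq3.symm, hq4.symm⟩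
          rw [this]; exact hget_new
        · exact Or.inr ⟨q, hq, hq1, hq2, hq3, hq4⟩
  · rw [if_neg hg]
    refine ⟨h.base, h.dpos, h.leD1, h.remVal, h.accVal, h.rcVal, h.covered, ?_⟩
    intro n hadj hn1 hn2 hn3
    rcases h.rcCov n hadj hn1 hn2 hn3 with hl | ⟨q, hqmem, hq1, hq2, hq3, hq4⟩
    · exact Or.inl hl
    · rcases List.mem_cons.mp hqmem with hq | hq
      · rw [hq] at hq1 hq2 hq3 hq4
        left
        have hb1 : p.1 < (rows : Int) := by omega
        have hb2 : p.2 < (cols : Int) := by omega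
        have hcell : pvCell map p.1.toNat p.2.toNat ≠ "#" := by
          rw [show p.1.toNat = n.1 from hq3, show p.2.toNat = n.2 from hq4]; exact hn3
        cases hv : st.1.get? (p.1.toNat, p.2.toNat) with
        | none => exact absurd ⟨hq1, hb1, hq2, hb2, hcell, hv⟩ hg
        | some v =>
          have hle := h.leD1 _ (PySem.Dict.mem_items_of_get?_eq_some _ hv)
          refine ⟨v, ?_, hle⟩
          have : n = (p.1.toNat, p.2.toNat) := by
            obtain ⟨n1, n2⟩ := n
            simp only [Prod.mk.injEq]
            exact ⟨hq3.symm, hq4.symm⟩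
          rw [this]; exact hv
      · exact Or.inr ⟨q, hq, hq1, hq2, hq3, hq4⟩

theorem pvLN_fold (map : List (List String)) (rows cols : Nat) (s : Nat × Nat) (d : Int)
    (rc : Nat × Nat) (rem : List (Nat × Nat)) :
    ∀ (ps : List (Int × Int)), (∀ p ∈ ps, p ∈ pvNbrs rc) →
    ∀ st, pvLN map rows cols s d rc st rem ps →
    pvLN map rows cols s d rc (ps.foldl (pvBodyL map rows cols (d + 1)) st) rem [] := by
  intro ps
  induction ps with
  | nil => intro _ st h; exact h
  | cons p ps ih =>
    intro hsub st h
    simp only [List.foldl_cons]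
    exact ih (fun q hq => hsub q (by simp [hq])) _
      (pvLN_step map rows cols s d rc st rem p ps (hsub p (by simp)) h)

theorem pvLM_to_pvLN (map : List (List String)) (rows cols : Nat) (s : Nat × Nat) (d : Int)
    (rc : Nat × Nat) (rem : List (Nat × Nat)) (st : PySem.Dict (Nat × Nat) Int × List (Nat × Nat))
    (h : pvLM map rows cols s d st (rc :: rem)) :
    pvLN map rows cols s d rc st rem (pvNbrs rc) := by
  refine ⟨h.base, h.dpos, h.leD1, fun x hx => h.todoVal x (by simp [hx]),
    h.accVal, h.todoVal rc (by simp), ?_, ?_⟩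
  · intro q hq hq1 hq2 hq3 n hadj hn1 hn2 hn3
    exact h.covered q hq (by simp [hq1]; exact fun he => hq3 he) hq2 n hadj hn1 hn2 hn3
  · intro n hadj hn1 hn2 hn3
    exact Or.inr (pvAdj_mem_nbrs rc n hadj)

theorem pvLN_to_pvLM (map : List (List String)) (rows cols : Nat) (s : Nat × Nat) (d : Int)
    (rc : Nat × Nat) (rem : List (Nat × Nat)) (st : PySem.Dict (Nat × Nat) Int × List (Nat × Nat))
    (h : pvLN map rows cols s d rc st rem []) :
    pvLM map rows cols s d st rem := by
  refine ⟨h.base, h.dpos, h.leD1, h.remVal, h.accVal, ?_⟩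
  intro q hq hq1 hq2 n hadj hn1 hn2 hn3
  by_cases hqrc : q.1 = rc
  · have hqv : st.1.get? q.1 = some q.2 := PySem.Dict.get?_of_mem_items _ hq h.base.nodup
    rw [hqrc, h.rcVal] at hqv
    have hqd : q.2 = d := by
      have := Option.some.inj hqv
      omega
    rcases h.rcCov n (by rw [← hqrc]; exact hadj) hn1 hn2 hn3 with ⟨v, hv, hvle⟩ | ⟨p, hp, -⟩
    · exact ⟨v, hv, by omega⟩
    · simp at hp
  · exact h.covered q hq hq1 hq2 hqrc n hadj hn1 hn2 hn3

theorem pvStepL_good (map : List (List String)) (rows cols : Nat) (s : Nat × Nat) (d : Int)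
    (rc : Nat × Nat) (rem : List (Nat × Nat)) (st : PySem.Dict (Nat × Nat) Int × List (Nat × Nat))
    (h : pvLM map rows cols s d st (rc :: rem)) :
    pvLM map rows cols s d (pvStepL map rows cols (d + 1) st rc) rem := by
  rw [pvStepL_eq]
  exact pvLN_to_pvLM map rows cols s d rc rem _
    (pvLN_fold map rows cols s d rc rem (pvNbrs rc) (fun _ hp => hp) st
      (pvLM_to_pvLN map rows cols s d rc rem st h))

theorem pvLevel_good (map : List (List String)) (rows cols : Nat) (s : Nat × Nat) (d : Int) :
    ∀ (front : List (Nat × Nat)) (st : PySem.Dict (Nat × Nat) Int × List (Nat × Nat)),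
    pvLM map rows cols s d st front →
    pvLM map rows cols s d (front.foldl (pvStepL map rows cols (d + 1)) st) [] := by
  intro front
  induction front with
  | nil => intro st h; exact h
  | cons rc rem ih =>
    intro st h
    simp only [List.foldl_cons]
    exact ih _ (pvStepL_good map rows cols s d rc rem st h)

theorem pvLS_next (map : List (List String)) (rows cols : Nat) (s : Nat × Nat) (d : Int)
    (dist : PySem.Dict (Nat × Nat) Int) (front : List (Nat × Nat))
    (h : pvLS map rows cols s d dist front) :
    pvLS map rows cols s (d + 1)
      (front.foldl (pvStepL map rows cols (d + 1)) (dist, [])).1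
      (front.foldl (pvStepL map rows cols (d + 1)) (dist, [])).2 := by
  have hM : pvLM map rows cols s d (dist, []) front := by
    refine ⟨h.base, h.dpos, fun p hp => le_trans (h.leD p hp) (by omega), h.frontVal,
      by intro x hx; simp at hx, ?_⟩
    intro q hq hq1 _ n hadj hn1 hn2 hn3
    exact h.covered q hq hq1 n hadj hn1 hn2 hn3
  have hE := pvLevel_good map rows cols s d front (dist, []) hM
  exact ⟨hE.base, by have := h.dpos; omega, hE.leD1, hE.accVal, by
    intro q hq hq2 n hadj hn1 hn2 hn3
    exact hE.covered q hq (by simp) hq2 n hadj hn1 hn2 hn3⟩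

-- the facts the rest of the proof needs about the finished level-BFS dict
def pvLFinal (map : List (List String)) (rows cols : Nat) (s : Nat × Nat)
    (dist : PySem.Dict (Nat × Nat) Int) : Prop :=
  pvLG map rows cols s dist ∧
    ∀ p ∈ dist.items, ∀ n : Nat × Nat, pvAdj p.1 n → n.1 < rows → n.2 < cols →
      pvCell map n.1 n.2 ≠ "#" → ∃ v, dist.get? n = some v ∧ v ≤ p.2 + 1

theorem pvLoopL_good (map : List (List String)) (rows cols : Nat) (s : Nat × Nat) :
    ∀ (n : Nat) (dist : PySem.Dict (Nat × Nat) Int) (front : List (Nat × Nat)) (d : Int),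
    pvCnL rows cols dist + front.length ≤ n →
    pvLS map rows cols s d dist front →
    pvLFinal map rows cols s (pvLoopL map rows cols dist front d) := by
  intro n
  induction n with
  | zero =>
    intro dist front d hn h
    have : front = [] := by
      cases front with
      | nil => rfl
      | cons a l => simp at hn
    subst this
    rw [pvLoopL]
    exact ⟨h.base, fun p hp m hadj h1 h2 h3 => h.covered p hp (by simp) m hadj h1 h2 h3⟩
  | succ n ihn =>
    intro dist front d hn h
    cases front with
    | nil =>
      rw [pvLoopL]
      exact ⟨h.base, fun p hp m hadj h1 h2 h3 => h.covered p hp (by simp) m hadj h1 h2 h3⟩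
    | cons rc rest =>
      rw [pvLoopL]
      have hmeas := pvLevelL_meas map rows cols (d + 1) (rc :: rest) (dist, [])
      apply ihn
      · simp only [List.length_nil, List.length_cons] at hmeas hn ⊢
        omega
      · exact pvLS_next map rows cols s d dist (rc :: rest) h

theorem pvLS_init (map : List (List String)) (rows cols : Nat) (s : Nat × Nat)
    (hs1 : s.1 < rows) (hs2 : s.2 < cols) :
    pvLS map rows cols s 0 (PySem.Dict.empty.insert s (0 : Int)) [s] := by
  have hit : (PySem.Dict.empty.insert s (0 : Int)).items = [(s, (0 : Int))] := by
    rw [PySem.Dict.items_insert, PySem.Dict.contains_empty]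
    have : (PySem.Dict.empty : PySem.Dict (Nat × Nat) Int).items = [] :=
      List.eq_nil_of_length_eq_zero PySem.Dict.size_empty
    simp [this]
  refine ⟨⟨?_, PySem.Dict.get?_insert_self _ _ _, ?_, ?_, ?_, ?_, ?_⟩, le_refl 0, ?_, ?_, ?_⟩
  · exact PySem.Dict.nodup_keys_insert _ _ _ PySem.Dict.nodup_keys_empty
  · intro p hp; rw [hit] at hp; simp at hp; subst hp; exact ⟨hs1, hs2⟩
  · intro p hp; rw [hit] at hp; simp at hp; subst hp; exact le_refl _
  · intro p hp
    rw [hit] at hp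
    simp at hp
    subst hp
    rw [hit]
    simp
  · intro p hp _; rw [hit] at hp; simp at hp; subst hp; rfl
  · intro p hp h1; rw [hit] at hp; simp at hp; subst hp; simp at h1
  · intro p hp; rw [hit] at hp; simp at hp; subst hp; exact le_refl _
  · intro x hx; simp at hx; subst hx; exact PySem.Dict.get?_insert_self _ _ _
  · intro p hp hmem
    rw [hit] at hp
    simp at hp
    subst hp
    simp at hmem

theorem pvRect_length (rows cols : Nat) : (pvRect rows cols).length = rows * cols := by
  unfold pvRect
  rw [List.length_flatMap]
  have : ((List.range rows).map fun r => ((List.range cols).map (fun c => (r, c))).length) =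
      List.replicate rows cols := by
    rw [show (fun r => ((List.range cols).map (fun c => (r, c))).length) = (fun _ : Nat => cols) from by
      funext r; simp]
    simp [List.map_const']
  rw [this, List.sum_replicate]
  simp [Nat.mul_comm]

theorem pvLG_bound (map : List (List String)) (rows cols : Nat) (s : Nat × Nat)
    (dist : PySem.Dict (Nat × Nat) Int) (h : pvLG map rows cols s dist) :
    ∀ p ∈ dist.items, p.2 < ((rows * cols : Nat) : Int) := by
  intro p hp
  have h1 := h.ltLen p hp
  have hsub : dist.keys ⊆ pvRect rows cols := by
    intro k hk
    simp only [PySem.Dict.keys, List.mem_map] at hk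
    obtain ⟨q, hq, hqk⟩ := hk
    obtain ⟨hq1, hq2⟩ := h.inRect q hq
    rw [← hqk]
    exact (pvRect_mem rows cols q.1.1 q.1.2).mpr ⟨hq1, hq2⟩
  have hlen : dist.keys.length ≤ (pvRect rows cols).length :=
    (List.subperm_of_subset h.nodup hsub).length_le
  have hkeys : dist.keys.length = dist.items.length := by
    simp [PySem.Dict.keys]
  rw [pvRect_length] at hlen
  have : dist.items.length ≤ rows * cols := by omega
  have hcast : (dist.items.length : Int) ≤ ((rows * cols : Nat) : Int) := by exact_mod_cast this
  omega

-- ----- B's relaxation fold: upper and lower bounds -----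

theorem pvRelaxFold_le_cand (rows cols : Nat) (dist : List (List Int)) :
    ∀ (l : List (Int × Int)) (acc : Int) (p : Int × Int), p ∈ l →
    0 ≤ p.1 → p.1 < (rows : Int) → 0 ≤ p.2 → p.2 < (cols : Int) →
    l.foldl (pvRelaxStep rows cols dist) acc ≤ pvGet2 dist p.1.toNat p.2.toNat + 1 := by
  intro l
  induction l with
  | nil => intro acc p hp; simp at hp
  | cons q l ih =>
    intro acc p hp h1 h2 h3 h4
    simp only [List.foldl_cons]
    rcases List.mem_cons.mp hp with hq | hq
    · subst hq
      by_cases hlt : pvGet2 dist p.1.toNat p.2.toNat + 1 < acc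
      · have : pvRelaxStep rows cols dist acc p = pvGet2 dist p.1.toNat p.2.toNat + 1 := by
          unfold pvRelaxStep
          rw [if_pos ⟨h1, h2, h3, h4, hlt⟩]
        rw [this]
        exact pvRelaxFold_le_init rows cols dist l _
      · have hstep : pvRelaxStep rows cols dist acc p ≤ pvGet2 dist p.1.toNat p.2.toNat + 1 := by
          unfold pvRelaxStep
          split
          · omega
          · omega
        exact le_trans (pvRelaxFold_le_init rows cols dist l _) hstep
    · exact ih _ p hq h1 h2 h3 h4

theorem pvRelaxFold_lb (rows cols : Nat) (dist : List (List Int)) (B : Int) :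
    ∀ (l : List (Int × Int)) (acc : Int), B ≤ acc →
    (∀ p ∈ l, 0 ≤ p.1 → p.1 < (rows : Int) → 0 ≤ p.2 → p.2 < (cols : Int) →
      B ≤ pvGet2 dist p.1.toNat p.2.toNat + 1) →
    B ≤ l.foldl (pvRelaxStep rows cols dist) acc := by
  intro l
  induction l with
  | nil => intro acc hacc _; exact hacc
  | cons q l ih =>
    intro acc hacc hc
    simp only [List.foldl_cons]
    refine ih _ ?_ (fun p hp => hc p (by simp [hp]))
    unfold pvRelaxStep
    split
    · next hg => exact hc q (by simp) hg.1 hg.2.1 hg.2.2.1 hg.2.2.2.1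
    · exact hacc

theorem pvGet2_init (rows cols : Nat) (s : Nat × Nat) (inf : Int) {r c : Nat}
    (hr : r < rows) (hc : c < cols) :
    pvGet2 (pvInitJ rows cols s inf) r c = if (r, c) = s then 0 else inf := by
  have hrow : (pvInitJ rows cols s inf).getD r [] =
      (List.range cols).map (fun c => if (r, c) = s then (0 : Int) else inf) := by
    unfold pvInitJ
    rw [List.getD_eq_getElem?_getD, List.getElem?_map, List.getElem?_range hr]
    rfl
  unfold pvGet2
  rw [hrow, List.getD_eq_getElem?_getD, List.getElem?_map, List.getElem?_range hc]
  rfl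

theorem pvGetD_le_inf (dL : PySem.Dict (Nat × Nat) Int) (inf : Int)
    (hb : ∀ p ∈ dL.items, p.2 < inf) (x : Nat × Nat) : dL.getD x inf ≤ inf := by
  cases hv : dL.get? x with
  | none => rw [PySem.Dict.getD_of_get?_eq_none _ _ hv]
  | some v =>
    rw [PySem.Dict.getD_of_get?_eq_some _ _ hv]
    exact le_of_lt (hb _ (PySem.Dict.mem_items_of_get?_eq_some _ hv))

-- one sweep preserves the lower bound given by the BFS distances
theorem pvLowerSweep (map : List (List String)) (rows cols : Nat) (s : Nat × Nat)
    (dL : PySem.Dict (Nat × Nat) Int) (inf : Int) (g : List (List Int))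
    (hF : pvLFinal map rows cols s dL) (hb : ∀ p ∈ dL.items, p.2 < inf)
    (hg : ∀ r < rows, ∀ c < cols, dL.getD (r, c) inf ≤ pvGet2 g r c) :
    ∀ r < rows, ∀ c < cols, dL.getD (r, c) inf ≤ pvGet2 (pvSweep map rows cols g) r c := by
  intro r hr c hc
  rw [pvGet2_sweep map rows cols g hr hc]
  unfold pvRelax
  split
  · next hopen =>
    refine pvRelaxFold_lb rows cols g _ _ _ (hg r hr c hc) ?_
    intro p hp h1 h2 h3 h4
    have hadj : pvAdj (r, c) (p.1.toNat, p.2.toNat) := pvNbrs2_adj r c p hp h1 h3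
    have hn1 : p.1.toNat < rows := by omega
    have hn2 : p.2.toNat < cols := by omega
    cases hv : dL.get? (p.1.toNat, p.2.toNat) with
    | some v =>
      have hmem := PySem.Dict.mem_items_of_get?_eq_some _ hv
      obtain ⟨w, hw, hwle⟩ := hF.2 _ hmem (r, c) (pvAdj_symm hadj) hr hc hopen
      rw [PySem.Dict.getD_of_get?_eq_some _ _ hw]
      have hlow := hg p.1.toNat hn1 p.2.toNat hn2
      rw [PySem.Dict.getD_of_get?_eq_some _ _ hv] at hlow
      omega
    | none =>
      have hlow := hg p.1.toNat hn1 p.2.toNat hn2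
      rw [PySem.Dict.getD_of_get?_eq_none _ _ hv] at hlow
      have := pvGetD_le_inf dL inf hb (r, c)
      omega
  · exact hg r hr c hc

-- the sweep loop: its result satisfies both bounds and is a fixpoint of the sweep
theorem pvLoopJ_spec (map : List (List String)) (rows cols : Nat) (s : Nat × Nat)
    (dL : PySem.Dict (Nat × Nat) Int) (inf : Int) (g0 : List (List Int))
    (hF : pvLFinal map rows cols s dL) (hb : ∀ p ∈ dL.items, p.2 < inf) :
    ∀ (n : Nat) (g : List (List Int)) (h : pvInvJ rows cols g), pvSumJ rows cols g ≤ n →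
    (∀ r < rows, ∀ c < cols, dL.getD (r, c) inf ≤ pvGet2 g r c) →
    (∀ r < rows, ∀ c < cols, pvGet2 g r c ≤ pvGet2 g0 r c) →
    (∀ r < rows, ∀ c < cols, dL.getD (r, c) inf ≤ pvGet2 (pvLoopJ map rows cols g h) r c ∧
       pvGet2 (pvLoopJ map rows cols g h) r c ≤ pvGet2 g0 r c) ∧
    pvSweep map rows cols (pvLoopJ map rows cols g h) = pvLoopJ map rows cols g h := by
  intro n
  induction n with
  | zero =>
    intro g h hn hlow hup
    rw [pvLoopJ]
    by_cases hs : pvSweep map rows cols g = g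
    · rw [dif_pos hs]
      exact ⟨fun r hr c hc => ⟨hlow r hr c hc, hup r hr c hc⟩, hs⟩
    · exfalso
      have := pvSweep_dec map rows cols g h hs
      omega
  | succ n ihn =>
    intro g h hn hlow hup
    rw [pvLoopJ]
    by_cases hs : pvSweep map rows cols g = g
    · rw [dif_pos hs]
      exact ⟨fun r hr c hc => ⟨hlow r hr c hc, hup r hr c hc⟩, hs⟩
    · rw [dif_neg hs]
      have hdec := pvSweep_dec map rows cols g h hs
      refine ihn (pvSweep map rows cols g) (pvSweep_invJ map rows cols g h) (by omega)
        (pvLowerSweep map rows cols s dL inf g hF hb hlow) ?_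
      intro r hr c hc
      rw [pvGet2_sweep map rows cols g hr hc]
      exact le_trans (pvRelax_le map rows cols g r c) (hup r hr c hc)

-- at a fixpoint of the sweep, every BFS distance is also an upper bound
theorem pvFixLe (map : List (List String)) (rows cols : Nat) (s : Nat × Nat)
    (dL : PySem.Dict (Nat × Nat) Int) (res : List (List Int))
    (hF : pvLFinal map rows cols s dL)
    (hfix : pvSweep map rows cols res = res)
    (hstart : pvGet2 res s.1 s.2 ≤ 0) :
    ∀ (k : Nat) (x : Nat × Nat) (v : Int), dL.get? x = some v → v.toNat = k →
      pvGet2 res x.1 x.2 ≤ v := by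
  intro k
  induction k using Nat.strong_induction_on with
  | _ k ih =>
    intro x v hv hk
    have hmem := PySem.Dict.mem_items_of_get?_eq_some _ hv
    have hv0 : 0 ≤ v := hF.1.nonneg _ hmem
    by_cases hz : v = 0
    · subst hz
      have hx : x = s := hF.1.zeroS _ hmem rfl
      rw [hx]
      exact hstart
    · have hv1 : 1 ≤ v := by omega
      obtain ⟨hopen, n, hadj, hn⟩ := hF.1.supp _ hmem hv1
      have hnmem := PySem.Dict.mem_items_of_get?_eq_some _ hn
      have hnr := hF.1.inRect _ hnmem
      have hn1 : n.1 < rows := hnr.1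
      have hn2 : n.2 < cols := hnr.2
      have hxr := hF.1.inRect _ hmem
      have hx1 : x.1 < rows := hxr.1
      have hx2 : x.2 < cols := hxr.2
      have hkn : (v - 1).toNat < k := by omega
      have hihn := ih _ hkn n (v - 1) hn rfl
      obtain ⟨p, hpmem, hp1, hp2, hp3, hp4⟩ := pvAdj_mem_nbrs2 x.1 x.2 n hadj
      have : pvGet2 res x.1 x.2 = pvRelax map rows cols res x.1 x.2 := by
        rw [← pvGet2_sweep map rows cols res hx1 hx2, hfix]
      rw [this]
      unfold pvRelax
      rw [if_pos hopen]
      have hcand := pvRelaxFold_le_cand rows cols res (pvNbrs2 x.1 x.2)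
        (pvGet2 res x.1 x.2) p hpmem hp1 (by omega) hp2 (by omega)
      rw [hp3, hp4] at hcand
      omega

-- ----- the two final scans agree -----

theorem pvFoldl_rect {α : Type} (rows cols : Nat) (φ : α → Nat × Nat → α) (a0 : α) :
    (List.range rows).foldl (fun a r => (List.range cols).foldl (fun a c => φ a (r, c)) a) a0 =
      (pvRect rows cols).foldl φ a0 := by
  simp [pvRect, List.foldl_flatMap, List.foldl_map]

theorem pvScanCore (map : List (List String)) (inf : Int) (gA gB : List (List Int)) :
    ∀ (L : List (Nat × Nat)),
    (∀ x ∈ L, (pvGet2 gA x.1 x.2 = -1 ↔ pvGet2 gB x.1 x.2 = inf) ∧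
       (pvGet2 gA x.1 x.2 ≠ -1 → pvGet2 gA x.1 x.2 = pvGet2 gB x.1 x.2)) →
    ∀ acc : Option Int,
    L.foldl (fun acc x => acc.bind (fun t => if pvCell map x.1 x.2 = "G" then
        (if pvGet2 gA x.1 x.2 = -1 then none else some (t + pvGet2 gA x.1 x.2)) else some t)) acc =
    L.foldl (fun acc x => acc.bind (fun t => if pvCell map x.1 x.2 = "G" then
        (if pvGet2 gB x.1 x.2 = inf then none else some (t + pvGet2 gB x.1 x.2)) else some t)) acc := by
  intro L
  induction L with
  | nil => intro _ acc; rfl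
  | cons x L ih =>
    intro hyp acc
    simp only [List.foldl_cons]
    have hstep : (acc.bind (fun t => if pvCell map x.1 x.2 = "G" then
        (if pvGet2 gA x.1 x.2 = -1 then none else some (t + pvGet2 gA x.1 x.2)) else some t)) =
        (acc.bind (fun t => if pvCell map x.1 x.2 = "G" then
        (if pvGet2 gB x.1 x.2 = inf then none else some (t + pvGet2 gB x.1 x.2)) else some t)) := by
      cases acc with
      | none => rfl
      | some t =>
        simp only [Option.bind_some]
        by_cases hG : pvCell map x.1 x.2 = "G"
        · rw [if_pos hG, if_pos hG]
          obtain ⟨hiff, heq⟩ := hyp x (by simp)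
          by_cases hA : pvGet2 gA x.1 x.2 = -1
          · rw [if_pos hA, if_pos (hiff.mp hA)]
          · rw [if_neg hA, if_neg (fun hB => hA (hiff.mpr hB)), heq hA]
        · rw [if_neg hG, if_neg hG]
    rw [hstep]
    exact ih (fun y hy => hyp y (by simp [hy])) _

theorem pvScan_eq (map : List (List String)) (rows cols : Nat) (inf : Int)
    (gA gB : List (List Int))
    (hyp : ∀ x ∈ pvRect rows cols,
      (pvGet2 gA x.1 x.2 = -1 ↔ pvGet2 gB x.1 x.2 = inf) ∧
      (pvGet2 gA x.1 x.2 ≠ -1 → pvGet2 gA x.1 x.2 = pvGet2 gB x.1 x.2)) :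
    pvScanA map rows cols gA = pvScanB map rows cols inf gB := by
  unfold pvScanA pvScanB
  have hA := pvFoldl_rect (α := Option Int) rows cols
    (fun acc (x : Nat × Nat) => acc.bind (fun t => if pvCell map x.1 x.2 = "G" then
      (if pvGet2 gA x.1 x.2 = -1 then none else some (t + pvGet2 gA x.1 x.2)) else some t)) (some 0)
  have hB := pvFoldl_rect (α := Option Int) rows cols
    (fun acc (x : Nat × Nat) => acc.bind (fun t => if pvCell map x.1 x.2 = "G" then
      (if pvGet2 gB x.1 x.2 = inf then none else some (t + pvGet2 gB x.1 x.2)) else some t)) (some 0)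
  simp only [] at hA hB
  rw [hA, hB, pvScanCore map inf gA gB (pvRect rows cols) hyp (some 0)]

-- ----- the start found by the shared scan lies in the rectangle -----

theorem pvSScanAux (map : List (List String)) (Q : Nat × Nat → Prop) (r : Nat) :
    ∀ (cs : List Nat) (st0 : Option (Nat × Nat)),
    (∀ c ∈ cs, Q (r, c)) → (∀ x, st0 = some x → Q x) →
    ∀ x, (cs.foldl (fun st c => if pvCell map r c = "S" then some (r, c) else st) st0) = some x → Q x := by
  intro cs
  induction cs with
  | nil => intro st0 _ h0 x hx; exact h0 x hx
  | cons c cs ih =>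
    intro st0 hcs h0 x hx
    simp only [List.foldl_cons] at hx
    refine ih _ (fun c' hc' => hcs c' (by simp [hc'])) ?_ x hx
    intro y hy
    split at hy
    · exact (Option.some.inj hy) ▸ hcs c (by simp)
    · exact h0 y hy

theorem pvSScan_bounds (map : List (List String)) (rows cols : Nat) :
    ∀ (rs : List Nat), (∀ r ∈ rs, r < rows) → ∀ (st0 : Option (Nat × Nat)),
    (∀ x, st0 = some x → x.1 < rows ∧ x.2 < cols) →
    ∀ x, rs.foldl (fun st r => (List.range cols).foldl
        (fun st c => if pvCell map r c = "S" then some (r, c) else st) st) st0 = some x →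
    x.1 < rows ∧ x.2 < cols := by
  intro rs
  induction rs with
  | nil => intro _ st0 h0 x hx; exact h0 x hx
  | cons r rs ih =>
    intro hrs st0 h0 x hx
    simp only [List.foldl_cons] at hx
    refine ih (fun r' hr' => hrs r' (by simp [hr'])) _ ?_ x hx
    exact pvSScanAux map (fun y => y.1 < rows ∧ y.2 < cols) r (List.range cols) st0
      (fun c hc => ⟨hrs r (by simp), List.mem_range.mp hc⟩) h0

-- ===== VERDICT (by name: the statement is the Claim_ definition above) =====
theorem min_steps_to_deliver_spec : Claim_equal_min_steps_to_deliver := by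
  intro map _ hpre
  unfold Spec_min_steps_to_deliver min_steps_to_deliver min_steps_to_deliver_alt
  cases hscan : (List.range map.length).foldl (fun st r =>
      (List.range (map.headD []).length).foldl (fun st c =>
        if pvCell map r c = "S" then some (r, c) else st) st) (none : Option (Nat × Nat)) with
  | none =>
    obtain ⟨-, -, rc, hrcmem, -⟩ := hpre
    obtain ⟨r0, c0⟩ := rc
    have hc0 : c0 < (map.headD []).length := ((pvRect_mem _ _ _ _).mp hrcmem).2
    rw [if_neg (by omega)]
  | some s =>
    have hsb := pvSScan_bounds map map.length (map.headD []).length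
      (List.range map.length) (fun r hr => List.mem_range.mp hr) none
      (by intro x hx; simp at hx) s hscan
    obtain ⟨s1, s2⟩ := s
    have hs1 : s1 < map.length := hsb.1
    have hs2 : s2 < (map.headD []).length := hsb.2
    -- A-side initial state facts
    have h0 := pvInvA_init map.length (map.headD []).length s1 s2
    have hbase : ∀ r c : Nat, r < map.length → c < (map.headD []).length →
        pvGet2 (List.replicate map.length (List.replicate (map.headD []).length (-1 : Int))) r c = -1 := by
      intro r c hr hc
      have hrow : (List.replicate map.length (List.replicate (map.headD []).length (-1 : Int))).getD r []
          = List.replicate (map.headD []).length (-1 : Int) := by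
        rw [List.getD_eq_getElem?_getD, List.getElem?_replicate, if_pos hr]
        rfl
      unfold pvGet2
      rw [hrow, List.getD_eq_getElem?_getD, List.getElem?_replicate, if_pos hc]
      rfl
    have hg0len : s1 < (List.replicate map.length (List.replicate (map.headD []).length (-1 : Int))).length := by
      simpa using hs1
    have hg0clen : s2 < (List.replicate map.length
        (List.replicate (map.headD []).length (-1 : Int)))[s1].length := by
      rw [List.getElem_replicate]
      simpa using hs2
    have hself0 := pvGet2_set2_self (List.replicate map.length
        (List.replicate (map.headD []).length (-1 : Int))) s1 s2 0 hg0len hg0clen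
    have hRel0 : pvRel map.length (map.headD []).length
        (pvSet2 (List.replicate map.length (List.replicate (map.headD []).length (-1 : Int))) s1 s2 0)
        (PySem.Dict.empty.insert (s1, s2) 0) := by
      constructor
      · intro r c hr hc
        by_cases hx : (r, c) = (s1, s2)
        · obtain ⟨hx1, hx2⟩ := Prod.mk.injEq .. ▸ hx
          subst hx1; subst hx2
          rw [hself0, PySem.Dict.getD_insert]
          simp
        · rw [pvGet2_set2_ne _ _ _ _ _ _ hx, PySem.Dict.getD_insert, if_neg hx,
              hbase r c hr hc]
          simp
      · intro x hx
        rw [PySem.Dict.mem_items_insert] at hx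
        rcases hx with hx | ⟨hx, -⟩
        · rw [hx]
        · simp [PySem.Dict.empty] at hx
    have hfront0 : ∀ x ∈ [((s1 : Nat), (s2 : Nat))], x.1 < map.length ∧ x.2 < (map.headD []).length ∧
        pvGet2 (pvSet2 (List.replicate map.length
          (List.replicate (map.headD []).length (-1 : Int))) s1 s2 0) x.1 x.2 = 0 := by
      intro x hx
      simp only [List.mem_singleton] at hx
      subst hx
      exact ⟨hs1, hs2, hself0⟩
    have hRelF := pvMainLoop map map.length (map.headD []).length
      (pvCnL map.length (map.headD []).length (PySem.Dict.empty.insert (s1, s2) 0) + 1)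
      (pvSet2 (List.replicate map.length (List.replicate (map.headD []).length (-1 : Int))) s1 s2 0)
      (PySem.Dict.empty.insert (s1, s2) 0) [(s1, s2)] 0 h0 (by simp) hRel0 hfront0 (le_refl 0)
    -- the finished level-BFS dict and its structural facts
    have hFin := pvLoopL_good map map.length (map.headD []).length (s1, s2)
      (pvCnL map.length (map.headD []).length (PySem.Dict.empty.insert (s1, s2) 0) + 1)
      (PySem.Dict.empty.insert (s1, s2) 0) [(s1, s2)] 0 (by simp)
      (pvLS_init map map.length (map.headD []).length (s1, s2) hs1 hs2)
    set dL := pvLoopL map map.length (map.headD []).length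
      (PySem.Dict.empty.insert (s1, s2) 0) [(s1, s2)] 0 with hdL
    have hb : ∀ p ∈ dL.items, p.2 < (map.length : Int) * ((map.headD []).length : Int) := by
      intro p hp
      have := pvLG_bound map map.length (map.headD []).length (s1, s2) dL hFin.1 p hp
      push_cast at this
      exact this
    -- B's sweep loop on its initial field
    have hg0low : ∀ r < map.length, ∀ c < (map.headD []).length,
        dL.getD (r, c) ((map.length : Int) * ((map.headD []).length : Int)) ≤
          pvGet2 (pvInitJ map.length (map.headD []).length (s1, s2)
            ((map.length : Int) * ((map.headD []).length : Int))) r c := by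
      intro r hr c hc
      rw [pvGet2_init map.length (map.headD []).length (s1, s2) _ hr hc]
      by_cases hx : (r, c) = (s1, s2)
      · rw [if_pos hx, hx, PySem.Dict.getD_of_get?_eq_some _ _ hFin.1.start0]
      · rw [if_neg hx]
        exact pvGetD_le_inf dL _ hb (r, c)
    have hspec := pvLoopJ_spec map map.length (map.headD []).length (s1, s2) dL
      ((map.length : Int) * ((map.headD []).length : Int))
      (pvInitJ map.length (map.headD []).length (s1, s2)
        ((map.length : Int) * ((map.headD []).length : Int)))
      hFin hb
      (pvSumJ map.length (map.headD []).length (pvInitJ map.length (map.headD []).length (s1, s2)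
        ((map.length : Int) * ((map.headD []).length : Int))))
      (pvInitJ map.length (map.headD []).length (s1, s2)
        ((map.length : Int) * ((map.headD []).length : Int)))
      (pvInvJ_init map.length (map.headD []).length (s1, s2)
        ((map.length : Int) * ((map.headD []).length : Int)) (by positivity))
      (le_refl _) hg0low (fun r _ c _ => le_refl _)
    set R := pvLoopJ map map.length (map.headD []).length
      (pvInitJ map.length (map.headD []).length (s1, s2)
        ((map.length : Int) * ((map.headD []).length : Int)))
      (pvInvJ_init map.length (map.headD []).length (s1, s2)
        ((map.length : Int) * ((map.headD []).length : Int)) (by positivity)) with hRdef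
    have hstart : pvGet2 R s1 s2 ≤ 0 := by
      have h1 := (hspec.1 s1 hs1 s2 hs2).2
      rw [pvGet2_init map.length (map.headD []).length (s1, s2) _ hs1 hs2] at h1
      simpa using h1
    have hpt : ∀ r, r < map.length → ∀ c, c < (map.headD []).length →
        pvGet2 R r c = dL.getD (r, c) ((map.length : Int) * ((map.headD []).length : Int)) := by
      intro r hr c hc
      have hlow := (hspec.1 r hr c hc).1
      have hup := (hspec.1 r hr c hc).2
      cases hv : dL.get? (r, c) with
      | some v =>
        have hle : pvGet2 R r c ≤ v :=
          pvFixLe map map.length (map.headD []).length (s1, s2) dL R hFin hspec.2 hstart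
            v.toNat (r, c) v hv rfl
        rw [PySem.Dict.getD_of_get?_eq_some _ _ hv] at hlow ⊢
        omega
      | none =>
        rw [PySem.Dict.getD_of_get?_eq_none _ _ hv] at hlow ⊢
        rw [pvGet2_init map.length (map.headD []).length (s1, s2) _ hr hc] at hup
        have hne : (r, c) ≠ (s1, s2) := by
          intro he
          rw [he, hFin.1.start0] at hv
          exact absurd hv (by simp)
        rw [if_neg hne] at hup
        omega
    -- conclude: the two final scans agree cell by cell
    refine pvScan_eq map map.length (map.headD []).length _ _ _ ?_
    intro x hx
    have hxr : x.1 < map.length ∧ x.2 < (map.headD []).length := by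
      obtain ⟨x1, x2⟩ := x
      exact (pvRect_mem _ _ _ _).mp hx
    have hA : pvGet2 (pvLoopA map map.length (map.headD []).length
        (pvSet2 (List.replicate map.length (List.replicate (map.headD []).length (-1 : Int))) s1 s2 0)
        [(s1, s2)] h0) x.1 x.2 = dL.getD x (-1) := by
      have := hRelF.1 x.1 x.2 hxr.1 hxr.2
      rw [this]
    have hB : pvGet2 R x.1 x.2 =
        dL.getD x ((map.length : Int) * ((map.headD []).length : Int)) :=
      hpt x.1 hxr.1 x.2 hxr.2
    show (pvGet2 (pvLoopA map map.length (map.headD []).length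
        (pvSet2 (List.replicate map.length (List.replicate (map.headD []).length (-1 : Int))) s1 s2 0)
        [(s1, s2)] h0) x.1 x.2 = -1 ↔
        pvGet2 R x.1 x.2 = (map.length : Int) * ((map.headD []).length : Int)) ∧
      (pvGet2 (pvLoopA map map.length (map.headD []).length
        (pvSet2 (List.replicate map.length (List.replicate (map.headD []).length (-1 : Int))) s1 s2 0)
        [(s1, s2)] h0) x.1 x.2 ≠ -1 →
        pvGet2 (pvLoopA map map.length (map.headD []).length
        (pvSet2 (List.replicate map.length (List.replicate (map.headD []).length (-1 : Int))) s1 s2 0)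
        [(s1, s2)] h0) x.1 x.2 = pvGet2 R x.1 x.2)
    rw [hA, hB]
    cases hv : dL.get? x with
    | some v =>
      have hmem := PySem.Dict.mem_items_of_get?_eq_some _ hv
      have hv0 : 0 ≤ v := hFin.1.nonneg _ hmem
      have hvlt : v < (map.length : Int) * ((map.headD []).length : Int) := hb _ hmem
      rw [PySem.Dict.getD_of_get?_eq_some _ _ hv, PySem.Dict.getD_of_get?_eq_some _ _ hv]
      constructor
      · constructor
        · intro h; omega
        · intro h; omega
      · intro _; rfl
    | none =>
      rw [PySem.Dict.getD_of_get?_eq_none _ _ hv, PySem.Dict.getD_of_get?_eq_none _ _ hv]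
      exact ⟨by simp, fun h => absurd rfl h⟩
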